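-- pv_equiv track=rewrite | github.com/teamcors/EZPZ-PS-Study | programmers/DFS&BFS/퍼즐 조각 채우기_Queue-ri.py | board_bfs
-- ===== SOURCE A (Python) =====
-- from collections import deque, defaultdict
-- from math import inf
-- from copy import deepcopy
--
-- def board_bfs(y, x, board):
--     board_cp = deepcopy(board)
--     q = deque()
--     q.append((y, x))
--     board_cp[y][x] = 1
--
--     di = [-1, 1, 0, 0]
--     dj = [0, 0, -1, 1]
--     MAX_IDX = len(board)-1
--
--     minX, minY, maxX, maxY = inf, inf, -1, -1
--     while q:
--         i, j = q.popleft()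
--
--         if i < minY: minY = i
--         if maxY < i: maxY = i
--         if j < minX: minX = j
--         if maxX < j: maxX = j
--
--         for k in range(4):
--             ni = i + di[k]
--             nj = j + dj[k]
--
--             if ni < 0 or MAX_IDX < ni or nj < 0 or MAX_IDX < nj:
--                 continue
--             if not board_cp[ni][nj]:
--                 q.append((ni, nj))
--                 board_cp[ni][nj] = 1
--
--     slce = []
--     for i in range(minY, maxY+1):
--         row = board[i]
--         slce.append(row[minX:maxX+1])
--
--     return slce, board_cp
-- ===== SOURCE B (Python) =====
-- from math import inf
--
-- def board_bfs(y, x, board):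
--     n = len(board)
--     board_cp = [row[:] for row in board]
--     board_cp[y][x] = 1
--     seen = {(y, x)}
--     # queue-free flood fill: sweep the grid until no cell changes any more
--     changed = True
--     while changed:
--         changed = False
--         for i in range(n):
--             row = board_cp[i]
--             for j in range(min(n, len(row))):
--                 if row[j] == 0 and ((i - 1, j) in seen or (i + 1, j) in seen
--                                     or (i, j - 1) in seen or (i, j + 1) in seen):
--                     row[j] = 1
--                     seen.add((i, j))
--                     changed = True
--     # bounding box over every visited cell (order over the set cannot matter)
--     minX = minY = inf
--     maxX = maxY = -1
--     for i, j in seen: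
--         if i < minY: minY = i
--         if maxY < i: maxY = i
--         if j < minX: minX = j
--         if maxX < j: maxX = j
--     slce = [board[i][minX:maxX + 1] for i in range(minY, maxY + 1)]
--     return slce, board_cp
-- ===== Notes on version B (the rewrite author's own statement) =====
-- stated objective: alternative
-- what changed: Replaces A's deque-driven BFS (pop one cell, update min/max per popped cell, probe its four neighbours) with a queue-free fixed-point label propagation: whole-grid row-major sweeps repeatedly mark every free cell adjacent to the visited set until a sweep changes nothing, and only then the bounding box and the crop are computed from the final set.
import Mathlib
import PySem

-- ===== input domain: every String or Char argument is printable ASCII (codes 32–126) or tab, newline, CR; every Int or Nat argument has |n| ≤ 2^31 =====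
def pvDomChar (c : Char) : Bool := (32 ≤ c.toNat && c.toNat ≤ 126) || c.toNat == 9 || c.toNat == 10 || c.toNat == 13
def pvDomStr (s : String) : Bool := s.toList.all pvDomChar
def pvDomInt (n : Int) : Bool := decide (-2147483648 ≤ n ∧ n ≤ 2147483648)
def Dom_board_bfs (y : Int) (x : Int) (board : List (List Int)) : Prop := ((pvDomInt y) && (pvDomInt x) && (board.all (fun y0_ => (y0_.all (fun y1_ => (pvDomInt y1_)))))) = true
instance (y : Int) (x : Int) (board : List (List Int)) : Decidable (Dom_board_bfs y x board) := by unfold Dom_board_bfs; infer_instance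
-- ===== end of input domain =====

-- B replaces A's queue-driven BFS flood fill (deque popping one cell at a time, with
-- min/max updated per popped cell) by a queue-free fixed-point label propagation:
-- repeated whole-grid row-major sweeps mark every free cell adjacent to the visited set
-- until a sweep changes nothing; bounding box and crop are computed from the final set
-- with the same seeds and the same crop loop as A (objective: alternative).

-- ===== PORT A =====

-- board[i][j] as an Option (none = IndexError)
def pvGet2 (g : List (List Int)) (i j : Int) : Option Int :=
  (PySem.List.pyGet? g i).bind (fun r => PySem.List.pyGet? r j)

-- board[i][j] = v (no-op where Python would raise; only in-range writes occur inside Pre_)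
def pvSet2 (g : List (List Int)) (i j : Int) (v : Int) : List (List Int) :=
  match PySem.List.pyGet? g i with
  | some row => PySem.List.pySetD g i (PySem.List.pySetD row j v)
  | none => g

-- number of 0 entries of the grid (termination measure for A's while loop)
def pvZeros (g : List (List Int)) : Nat :=
  (g.map (fun r => r.countP (fun v => v = 0))).sum

-- one neighbour probe of A's inner `for k in range(4)` body
def pvADir (mi : Int) (s : List (List Int) × List (Int × Int)) (ni nj : Int) :
    List (List Int) × List (Int × Int) :=
  if ni < 0 ∨ mi < ni ∨ nj < 0 ∨ mi < nj then s
  else match pvGet2 s.1 ni nj with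
    | some v => if v = 0 then (pvSet2 s.1 ni nj 1, s.2 ++ [(ni, nj)]) else s
    | none => s

lemma pvCountP_set_zero (r : List Int) (m : Nat) (hm : m < r.length) (h0 : r[m] = 0) :
    (r.set m 1).countP (fun v => decide (v = 0)) + 1 = r.countP (fun v => decide (v = 0)) := by
  induction r generalizing m with
  | nil => simp at hm
  | cons a t ih =>
    cases m with
    | zero => simp_all
    | succ k =>
      simp only [List.set_cons_succ, List.countP_cons]
      have := ih k (by simpa using hm) (by simpa using h0)
      omega

lemma pvSum_set (l : List Nat) (k : Nat) (v : Nat) (hk : k < l.length) :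
    (l.set k v).sum + l[k] = l.sum + v := by
  induction l generalizing k with
  | nil => simp at hk
  | cons a t ih =>
    cases k with
    | zero => simp [List.sum_cons]; omega
    | succ m =>
      simp only [List.set_cons_succ, List.sum_cons, List.getElem_cons_succ]
      have := ih m (by simpa using hk)
      omega

lemma pvZeros_set2 (g : List (List Int)) (i j : Int) (hi : 0 ≤ i) (hj : 0 ≤ j)
    (h : pvGet2 g i j = some 0) : pvZeros (pvSet2 g i j 1) + 1 = pvZeros g := by
  rcases Option.bind_eq_some_iff.1 h with ⟨row, hrow, hcell⟩
  rw [PySem.List.pyGet?_of_nonneg _ hi] at hrow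
  rw [PySem.List.pyGet?_of_nonneg _ hj] at hcell
  have hilen : i.toNat < g.length := by
    rcases Nat.lt_or_ge i.toNat g.length with h' | h'
    · exact h'
    · rw [List.getElem?_eq_none h'] at hrow; cases hrow
  have hjlen : j.toNat < row.length := by
    rcases Nat.lt_or_ge j.toNat row.length with h' | h'
    · exact h'
    · rw [List.getElem?_eq_none h'] at hcell; cases hcell
  have hrow' : g[i.toNat] = row := by simpa [List.getElem?_eq_getElem hilen] using hrow
  have hcell' : row[j.toNat] = 0 := by simpa [List.getElem?_eq_getElem hjlen] using hcell
  have hset : pvSet2 g i j 1 = g.set i.toNat (row.set j.toNat 1) := by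
    have hiC : (i : Int) = ((i.toNat : Nat) : Int) := by omega
    have hjC : (j : Int) = ((j.toNat : Nat) : Int) := by omega
    unfold pvSet2
    rw [PySem.List.pyGet?_of_nonneg _ hi, List.getElem?_eq_getElem hilen, hrow']
    show (PySem.List.pySet? g i (PySem.List.pySetD row j 1)).getD g = _
    unfold PySem.List.pySetD
    rw [hjC, PySem.List.pySet?_natCast _ _ _ hjlen]
    rw [hiC, PySem.List.pySet?_natCast _ _ _ (by simpa using hilen)]
    simp only [Option.getD_some, Int.toNat_natCast]
  unfold pvZeros
  rw [hset, List.map_set]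
  have hmlen : i.toNat < (g.map (fun r => r.countP (fun v => decide (v = 0)))).length := by
    simpa using hilen
  have hs := pvSum_set (g.map (fun r => r.countP (fun v => decide (v = 0)))) i.toNat
      ((row.set j.toNat 1).countP (fun v => decide (v = 0))) hmlen
  have hg : (g.map (fun r => r.countP (fun v => decide (v = 0))))[i.toNat] =
      row.countP (fun v => decide (v = 0)) := by simp [hrow']
  have hc := pvCountP_set_zero row j.toNat hjlen hcell'
  rw [hg] at hs
  omega

-- each neighbour probe does not increase A's measure
lemma pvADir_measure (mi : Int) (s : List (List Int) × List (Int × Int)) (ni nj : Int) :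
    2 * pvZeros (pvADir mi s ni nj).1 + (pvADir mi s ni nj).2.length ≤
      2 * pvZeros s.1 + s.2.length := by
  unfold pvADir
  split_ifs with hb
  · exact le_refl _
  · rcases hg : pvGet2 s.1 ni nj with _ | v
    · simp
    · simp only
      split_ifs with hv
      · subst hv
        have := pvZeros_set2 s.1 ni nj (by omega) (by omega) hg
        simp only [List.length_append, List.length_cons, List.length_nil]
        omega
      · exact le_refl _

lemma pvFoldMeasure {σ α : Type} (m : σ → Nat) (f : σ → α → σ)
    (h : ∀ s a, m (f s a) ≤ m s) : ∀ (l : List α) (s : σ), m (l.foldl f s) ≤ m s := by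
  intro l
  induction l with
  | nil => intro s; simp
  | cons a t ih => intro s; exact le_trans (ih (f s a)) (h s a)

def pvDi : List Int := [-1, 1, 0, 0]
def pvDj : List Int := [0, 0, -1, 1]

-- i < minY with minY possibly inf (none)
def pvLtO (i : Int) (o : Option Int) : Bool :=
  match o with
  | none => true
  | some m => i < m

-- the four min/max updates of A's loop body, state (minX, minY, maxX, maxY)
def pvMM (mm : Option Int × Option Int × Int × Int) (c : Int × Int) :
    Option Int × Option Int × Int × Int :=
  let minY := if pvLtO c.1 mm.2.1 then some c.1 else mm.2.1
  let maxY := if mm.2.2.2 < c.1 then c.1 else mm.2.2.2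
  let minX := if pvLtO c.2 mm.1 then some c.2 else mm.1
  let maxX := if mm.2.2.1 < c.2 then c.2 else mm.2.2.1
  (minX, minY, maxX, maxY)

-- A's `while q:` loop
def pvALoop (mi : Int) (cp : List (List Int)) (q : List (Int × Int))
    (mm : Option Int × Option Int × Int × Int) :
    List (List Int) × (Option Int × Option Int × Int × Int) :=
  match q with
  | [] => (cp, mm)
  | (i, j) :: rest =>
    let mm' := pvMM mm (i, j)
    let s := (PySem.List.pyRange 0 4 1).foldl
      (fun s k => pvADir mi s (i + PySem.List.pyGetD pvDi k 0) (j + PySem.List.pyGetD pvDj k 0))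
      (cp, rest)
    pvALoop mi s.1 s.2 mm'
termination_by 2 * pvZeros cp + q.length
decreasing_by
  have := pvFoldMeasure (fun s : List (List Int) × List (Int × Int) => 2 * pvZeros s.1 + s.2.length)
    (fun s k => pvADir mi s (i + PySem.List.pyGetD pvDi k 0) (j + PySem.List.pyGetD pvDj k 0))
    (fun s k => pvADir_measure mi s _ _) (PySem.List.pyRange 0 4 1) (cp, rest)
  simp only [List.length_cons] at this ⊢
  omega

def board_bfs (y : Int) (x : Int) (board : List (List Int)) : List (List Int) × List (List Int) :=
  let board_cp := pvSet2 board y x 1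
  let maxIdx : Int := (board.length : Int) - 1
  let r := pvALoop maxIdx board_cp [(y, x)] (none, none, -1, -1)
  match r.2.1, r.2.2.1 with
  | some minX, some minY =>
    ((PySem.List.pyRange minY (r.2.2.2.2 + 1) 1).foldl
      (fun acc i => acc ++ [PySem.List.slice ((PySem.List.pyGet? board i).getD [])
        (some minX) (some (r.2.2.2.1 + 1))]) [], r.1)
  | _, _ => ([], r.1)  -- unreachable: the loop pops at least the start cell

-- ===== PORT B =====

-- the four neighbours of a cell (also used by Pre_ below)
def pvDirs4 (c : Int × Int) : List (Int × Int) :=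
  [(c.1 - 1, c.2), (c.1 + 1, c.2), (c.1, c.2 - 1), (c.1, c.2 + 1)]

-- the zero-valued cells of the board (termination measure only)
def pvZeroCells (board : List (List Int)) : List (Int × Int) :=
  (List.range board.length).flatMap (fun i =>
    (List.range ((board.getD i []).length)).filterMap (fun j =>
      if (board.getD i []).getD j 1 = 0 then some ((i : Int), (j : Int)) else none))

-- fold preservation of a property, step known only on members
lemma pvFoldPresMem {σ α : Type} (P : σ → Prop) (l : List α) (f : σ → α → σ)
    (h : ∀ s a, a ∈ l → P s → P (f s a)) : ∀ s, P s → P (l.foldl f s) := by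
  induction l with
  | nil => intro s hs; simpa using hs
  | cons a t ih =>
    intro s hs
    exact ih (fun s' b hb => h s' b (by simp [hb])) _ (h s a (by simp) hs)

-- one candidate cell of B's inner `for j in range(min(n, len(row)))` body
def pvSwStep (i : Int) (st : List (List Int) × PySem.Set (Int × Int) × Bool) (j : Int) :
    List (List Int) × PySem.Set (Int × Int) × Bool :=
  if pvGet2 st.1 i j = some 0 ∧
      ((i - 1, j) ∈ st.2.1 ∨ (i + 1, j) ∈ st.2.1 ∨ (i, j - 1) ∈ st.2.1 ∨ (i, j + 1) ∈ st.2.1)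
  then (pvSet2 st.1 i j 1, PySem.Set.add st.2.1 (i, j), true) else st

-- range(min(n, len(row)))
def pvRowIdx (n : Int) (cp : List (List Int)) (i : Int) : List Int :=
  PySem.List.pyRange 0 (min n (PySem.List.len ((PySem.List.pyGet? cp i).getD []))) 1

-- one full row-major sweep ('for i in range(n): for j in range(…)'), flag = changed
def pvSweep (n : Int) (cp : List (List Int)) (seen : PySem.Set (Int × Int)) :
    List (List Int) × PySem.Set (Int × Int) × Bool :=
  (PySem.List.pyRange 0 n 1).foldl
    (fun st i => (pvRowIdx n st.1 i).foldl (pvSwStep i) st) (cp, seen, false)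

-- a sweep that reports a change has strictly fewer zero cells left in the copy
lemma pvSweep_decr (n : Int) (cp : List (List Int)) (seen : PySem.Set (Int × Int))
    (h : (pvSweep n cp seen).2.2 = true) :
    pvZeros (pvSweep n cp seen).1 < pvZeros cp := by
  have main : (fun st : List (List Int) × PySem.Set (Int × Int) × Bool =>
      pvZeros st.1 ≤ pvZeros cp ∧ (st.2.2 = true → pvZeros st.1 < pvZeros cp))
      (pvSweep n cp seen) := by
    unfold pvSweep
    refine pvFoldPresMem (fun st : List (List Int) × PySem.Set (Int × Int) × Bool =>
      pvZeros st.1 ≤ pvZeros cp ∧ (st.2.2 = true → pvZeros st.1 < pvZeros cp)) _ _ ?_ _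
      ⟨le_refl _, by simp⟩
    intro st i hi hP
    have hi' := (PySem.List.mem_pyRange_one).1 hi
    refine pvFoldPresMem (fun st : List (List Int) × PySem.Set (Int × Int) × Bool =>
      pvZeros st.1 ≤ pvZeros cp ∧ (st.2.2 = true → pvZeros st.1 < pvZeros cp)) _ _ ?_ _ hP
    intro st2 j hj hP2
    have hj' := (PySem.List.mem_pyRange_one).1 hj
    unfold pvSwStep
    split_ifs with hc
    · have := pvZeros_set2 st2.1 i j (by omega) (by omega) hc.1
      obtain ⟨hP2a, _⟩ := hP2
      constructor
      · show pvZeros (pvSet2 st2.1 i j 1) ≤ pvZeros cp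
        omega
      · intro _
        show pvZeros (pvSet2 st2.1 i j 1) < pvZeros cp
        omega
    · exact hP2
  exact main.2 h

-- B's `while changed:` loop
def pvSweepLoop (n : Int) (cp : List (List Int)) (seen : PySem.Set (Int × Int)) :
    List (List Int) × PySem.Set (Int × Int) :=
  if (pvSweep n cp seen).2.2 = true
  then pvSweepLoop n (pvSweep n cp seen).1 (pvSweep n cp seen).2.1
  else ((pvSweep n cp seen).1, (pvSweep n cp seen).2.1)
termination_by pvZeros cp
decreasing_by exact pvSweep_decr n cp seen (by assumption)

def board_bfs_alt (y : Int) (x : Int) (board : List (List Int)) :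
    List (List Int) × List (List Int) :=
  let n : Int := (board.length : Int)
  -- board_cp = [row[:] for row in board] (identity copy); board_cp[y][x] = 1
  let r := pvSweepLoop n (pvSet2 board y x 1) (PySem.Set.ofList [(y, x)])
  -- the four bounding-box updates per visited cell (order over the set cannot matter)
  let mm := r.2.foldl pvMM (none, none, -1, -1)
  -- minX/minY can never still be the inf seed (seen holds the start cell), so the
  -- .getD 0 defaults below are formal only
  ((PySem.List.pyRange (mm.2.1.getD 0) (mm.2.2.2 + 1) 1).map (fun i =>
      PySem.List.slice ((PySem.List.pyGet? board i).getD []) (some (mm.1.getD 0))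
        (some (mm.2.2.1 + 1))),
   r.1)

-- ===== PRECONDITION & SPEC =====
-- every in-bounds neighbour of the given cell lies inside its (possibly ragged) row
def pvProbesOK (board : List (List Int)) (p : Int × Int) : Prop :=
  ∀ q ∈ pvDirs4 p, 0 ≤ q.1 → q.1 < board.length → 0 ≤ q.2 → q.2 < board.length →
    pvGet2 board q.1 q.2 ≠ none

-- Pre_: the start index pair must denote an existing cell under Python's (possibly
-- negative, wraparound) indexing — outside that A raises IndexError at board_cp[y][x] —
-- and no cell the flood fill could ever probe (a neighbour of the start, or of a 0-cell
-- that borders the start or another 0-cell) may lie past the end of a ragged row, since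
-- there A raises IndexError whenever the fill reaches it.  The ragged clause is a
-- (closed-form) over-approximation of reachability, so it also excludes some ragged
-- boards whose short rows the fill never actually reaches and on which A returns (see cites).
def Pre_board_bfs (y : Int) (x : Int) (board : List (List Int)) : Prop :=
  pvGet2 board y x ≠ none ∧ pvProbesOK board (y, x) ∧
    ∀ p ∈ pvZeroCells board, p.2 < board.length →
      (p = (y, x) ∨ (y, x) ∈ pvDirs4 p ∨
        ∃ q ∈ pvZeroCells board, q.2 < board.length ∧ q ∈ pvDirs4 p) →
      pvProbesOK board p
instance (y : Int) (x : Int) (board : List (List Int)) : Decidable (Pre_board_bfs y x board) := by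
  unfold Pre_board_bfs pvProbesOK
  exact @instDecidableAnd _ _ inferInstance
    (@instDecidableAnd _ _ inferInstance inferInstance)

def pvWitness_board_bfs : Int × Int × List (List Int) := (0, 1, [[0, 0], [5, 0]])

def Spec_board_bfs (y : Int) (x : Int) (board : List (List Int)) (out : List (List Int) × List (List Int)) : Prop := out = board_bfs_alt y x board
instance (y : Int) (x : Int) (board : List (List Int)) (out : List (List Int) × List (List Int)) : Decidable (Spec_board_bfs y x board out) := by unfold Spec_board_bfs; infer_instance

-- ===== CLAIM (what is proved, stated in full; the proofs are below) =====
def Claim_equal_board_bfs : Prop := ∀ (y : Int) (x : Int) (board : List (List Int)), Dom_board_bfs y x board → Pre_board_bfs y x board → Spec_board_bfs y x board (board_bfs y x board)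

-- ===== LEMMAS AND PROOFS =====

-- the cells the flood fill reaches from the start (shared characterisation of both programs)
inductive pvReach (n : Int) (board : List (List Int)) (start : Int × Int) : Int × Int → Prop
  | base : pvReach n board start start
  | step (p q : Int × Int) : pvReach n board start p → q ∈ pvDirs4 p →
      0 ≤ q.1 → q.1 < n → 0 ≤ q.2 → q.2 < n → pvGet2 board q.1 q.2 = some 0 →
      pvReach n board start q

lemma pvDirs4_symm (p q : Int × Int) : q ∈ pvDirs4 p ↔ p ∈ pvDirs4 q := by
  simp only [pvDirs4, List.mem_cons, List.not_mem_nil, or_false, Prod.ext_iff]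
  omega

-- zero cells not yet in the set (termination measure for B's while loop)
def pvZB (board : List (List Int)) (seen : PySem.Set (Int × Int)) : Nat :=
  ((pvZeroCells board).filter (fun p => ¬ p ∈ seen)).length

lemma pvMem_zeroCells (board : List (List Int)) (p : Int × Int)
    (h1 : 0 ≤ p.1) (h2 : 0 ≤ p.2) (h : pvGet2 board p.1 p.2 = some 0) :
    p ∈ pvZeroCells board := by
  rcases Option.bind_eq_some_iff.1 h with ⟨row, hrow, hcell⟩
  rw [PySem.List.pyGet?_of_nonneg _ h1] at hrow
  rw [PySem.List.pyGet?_of_nonneg _ h2] at hcell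
  have hilen : p.1.toNat < board.length := by
    rcases Nat.lt_or_ge p.1.toNat board.length with h' | h'
    · exact h'
    · rw [List.getElem?_eq_none h'] at hrow; cases hrow
  have hjlen : p.2.toNat < row.length := by
    rcases Nat.lt_or_ge p.2.toNat row.length with h' | h'
    · exact h'
    · rw [List.getElem?_eq_none h'] at hcell; cases hcell
  have hrow' : board[p.1.toNat] = row := by simpa [List.getElem?_eq_getElem hilen] using hrow
  have hcell' : row[p.2.toNat] = 0 := by simpa [List.getElem?_eq_getElem hjlen] using hcell
  unfold pvZeroCells
  refine List.mem_flatMap.2 ⟨p.1.toNat, List.mem_range.2 hilen, ?_⟩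
  refine List.mem_filterMap.2 ⟨p.2.toNat, ?_, ?_⟩
  · refine List.mem_range.2 ?_
    have : board.getD p.1.toNat [] = row := by
      rw [List.getD_eq_getElem?_getD, List.getElem?_eq_getElem hilen, hrow']; rfl
    rw [this]; exact hjlen
  · have hg : board.getD p.1.toNat [] = row := by
      rw [List.getD_eq_getElem?_getD, List.getElem?_eq_getElem hilen, hrow']; rfl
    rw [hg, List.getD_eq_getElem?_getD, List.getElem?_eq_getElem hjlen, hcell']
    simp [Int.toNat_of_nonneg h1, Int.toNat_of_nonneg h2]

lemma pvFilter_length_lt {α : Type} (l : List α) (p' p : α → Bool)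
    (hmono : ∀ x, p' x = true → p x = true) (x : α) (hx : x ∈ l)
    (hpx : p x = true) (hp'x : ¬ p' x = true) :
    (l.filter p').length < (l.filter p).length := by
  induction l with
  | nil => simp at hx
  | cons a t ih =>
    have hle : ∀ (t' : List α), (t'.filter p').length ≤ (t'.filter p).length := by
      intro t'
      have := List.countP_mono_left (p := p') (q := p) (l := t') (fun a _ h => hmono a h)
      simpa [← List.countP_eq_length_filter] using this
    rcases List.mem_cons.1 hx with rfl | hxt
    · rw [List.filter_cons_of_pos hpx, List.filter_cons_of_neg (by simpa using hp'x)]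
      have := hle t
      simp only [List.length_cons]
      omega
    · have := ih hxt
      by_cases h' : p' a = true
      · rw [List.filter_cons_of_pos (hmono a h'), List.filter_cons_of_pos h']
        simp only [List.length_cons]
        omega
      · rw [List.filter_cons_of_neg (by simpa using h')]
        by_cases h2 : p a = true
        · rw [List.filter_cons_of_pos h2]
          simp only [List.length_cons]
          omega
        · rw [List.filter_cons_of_neg (by simpa using h2)]
          exact this

-- adding a fresh zero cell strictly decreases the count of unvisited zero cells
lemma pvZB_add_lt (board : List (List Int)) (seen : PySem.Set (Int × Int)) (p : Int × Int)
    (h1 : 0 ≤ p.1) (h2 : 0 ≤ p.2) (h : pvGet2 board p.1 p.2 = some 0) (hns : ¬ p ∈ seen) :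
    pvZB board (PySem.Set.add seen p) < pvZB board seen := by
  unfold pvZB
  refine pvFilter_length_lt _ _ _ ?_ p (pvMem_zeroCells board p h1 h2 h) (by simpa using hns) ?_
  · intro q hq
    simp only [decide_eq_true_eq] at hq ⊢
    intro hqs
    exact hq ((PySem.Set.mem_add seen p q).2 (Or.inl hqs))
  · simp [PySem.Set.mem_add]

-- ghost: the board with every visited cell overwritten by 1 (the proofs' view of the marking)
def pvRebuild (board : List (List Int)) (seen : PySem.Set (Int × Int)) : List (List Int) :=
  board.mapIdx (fun i row => row.mapIdx (fun j v => if ((i : Int), (j : Int)) ∈ seen then 1 else v))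

-- abbreviation for the visit condition shared by both traversals
abbrev pvC (n : Int) (board : List (List Int)) (s : PySem.Set (Int × Int)) (p : Int × Int) : Prop :=
  0 ≤ p.1 ∧ p.1 < n ∧ 0 ≤ p.2 ∧ p.2 < n ∧ ¬ p ∈ s ∧ pvGet2 board p.1 p.2 = some 0

-- ghost: the new cells visited and resulting set when scanning one cell's neighbours
def pvSN (n : Int) (board : List (List Int)) (s : PySem.Set (Int × Int)) (c : Int × Int) :
    PySem.Set (Int × Int) × List (Int × Int) :=
  (pvDirs4 c).foldl
    (fun t p => if pvC n board t.1 p then (PySem.Set.add t.1 p, t.2 ++ [p]) else t) (s, [])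

lemma pvSN_thread (n : Int) (board : List (List Int)) (l : List (Int × Int)) :
    ∀ (s : PySem.Set (Int × Int)) (d : List (Int × Int)),
      l.foldl (fun t p => if pvC n board t.1 p then (PySem.Set.add t.1 p, t.2 ++ [p]) else t) (s, d)
        = ((l.foldl (fun t p => if pvC n board t.1 p then (PySem.Set.add t.1 p, t.2 ++ [p]) else t) (s, [])).1,
           d ++ (l.foldl (fun t p => if pvC n board t.1 p then (PySem.Set.add t.1 p, t.2 ++ [p]) else t) (s, [])).2) := by
  induction l with
  | nil => intro s d; simp
  | cons p r ih =>
    intro s d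
    simp only [List.foldl_cons]
    by_cases h : pvC n board s p
    · rw [if_pos h, if_pos h]
      rw [ih (PySem.Set.add s p) (d ++ [p]), ih (PySem.Set.add s p) ([] ++ [p])]
      simp
    · rw [if_neg h, if_neg h]
      exact ih s d

lemma pvSN_measure (n : Int) (board : List (List Int)) (s : PySem.Set (Int × Int)) (c : Int × Int) :
    pvZB board (pvSN n board s c).1 + (pvSN n board s c).2.length ≤ pvZB board s := by
  unfold pvSN
  have hstep : ∀ (t : PySem.Set (Int × Int) × List (Int × Int)) (p : Int × Int),
      pvZB board ((fun t p => if pvC n board t.1 p then (PySem.Set.add t.1 p, t.2 ++ [p]) else t) t p).1 +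
        ((fun t p => if pvC n board t.1 p then (PySem.Set.add t.1 p, t.2 ++ [p]) else t) t p).2.length ≤
      pvZB board t.1 + t.2.length := by
    intro t p
    simp only
    split_ifs with h
    · obtain ⟨hp1, _, hp2, _, hns, hg⟩ := h
      have := pvZB_add_lt board t.1 p hp1 hp2 hg hns
      simp only [List.length_append, List.length_cons, List.length_nil]
      omega
    · exact le_refl _
  have h := pvFoldMeasure (fun t : PySem.Set (Int × Int) × List (Int × Int) =>
      pvZB board t.1 + t.2.length)
    (fun t p => if pvC n board t.1 p then (PySem.Set.add t.1 p, t.2 ++ [p]) else t)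
    hstep (pvDirs4 c) (s, [])
  simpa using h

-- membership in the set component of a neighbour scan
lemma pvSN_mono (n : Int) (board : List (List Int)) (l : List (Int × Int)) :
    ∀ (s : PySem.Set (Int × Int)) (d : List (Int × Int)) (x : Int × Int), x ∈ s →
      x ∈ (l.foldl (fun t p => if pvC n board t.1 p then (PySem.Set.add t.1 p, t.2 ++ [p]) else t) (s, d)).1 := by
  induction l with
  | nil => intro s d x hx; simpa using hx
  | cons p r ih =>
    intro s d x hx
    simp only [List.foldl_cons]
    by_cases h : pvC n board s p
    · rw [if_pos h]
      exact ih _ _ x ((PySem.Set.mem_add s p x).2 (Or.inl hx))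
    · rw [if_neg h]
      exact ih _ _ x hx

lemma pvSN_mem (n : Int) (board : List (List Int)) (s : PySem.Set (Int × Int)) (c : Int × Int)
    (p : Int × Int) : p ∈ (pvSN n board s c).1 ↔ p ∈ s ∨ p ∈ (pvSN n board s c).2 := by
  unfold pvSN
  have key : ∀ (l : List (Int × Int)) (s : PySem.Set (Int × Int)),
      p ∈ (l.foldl (fun t q => if pvC n board t.1 q then (PySem.Set.add t.1 q, t.2 ++ [q]) else t) (s, [])).1
        ↔ p ∈ s ∨ p ∈ (l.foldl (fun t q => if pvC n board t.1 q then (PySem.Set.add t.1 q, t.2 ++ [q]) else t) (s, [])).2 := by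
    intro l
    induction l with
    | nil => intro s; simp
    | cons q r ih =>
      intro s
      simp only [List.foldl_cons]
      by_cases h : pvC n board s q
      · rw [if_pos h]
        rw [pvSN_thread n board r (PySem.Set.add s q) ([] ++ [q])]
        simp only [List.nil_append, List.mem_cons, List.mem_append,
          List.not_mem_nil, or_false]
        rw [ih (PySem.Set.add s q)]
        rw [PySem.Set.mem_add]
        tauto
      · rw [if_neg h]
        exact ih s
  exact key (pvDirs4 c) s

-- every newly visited cell of a scan is a qualifying neighbour of the scanned cell
lemma pvSN_new (n : Int) (board : List (List Int)) (s : PySem.Set (Int × Int)) (c : Int × Int) :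
    ∀ p ∈ (pvSN n board s c).2, p ∈ pvDirs4 c ∧
      0 ≤ p.1 ∧ p.1 < n ∧ 0 ≤ p.2 ∧ p.2 < n ∧ pvGet2 board p.1 p.2 = some 0 := by
  unfold pvSN
  have key : ∀ (l : List (Int × Int)) (s : PySem.Set (Int × Int)) (d : List (Int × Int)),
      (∀ q ∈ l, q ∈ pvDirs4 c) →
      (∀ p ∈ d, p ∈ pvDirs4 c ∧ 0 ≤ p.1 ∧ p.1 < n ∧ 0 ≤ p.2 ∧ p.2 < n ∧ pvGet2 board p.1 p.2 = some 0) →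
      ∀ p ∈ (l.foldl (fun t q => if pvC n board t.1 q then (PySem.Set.add t.1 q, t.2 ++ [q]) else t) (s, d)).2,
        p ∈ pvDirs4 c ∧ 0 ≤ p.1 ∧ p.1 < n ∧ 0 ≤ p.2 ∧ p.2 < n ∧ pvGet2 board p.1 p.2 = some 0 := by
    intro l
    induction l with
    | nil => intro s d _ hd; simpa using hd
    | cons q r ih =>
      intro s d hl hd
      simp only [List.foldl_cons]
      by_cases h : pvC n board s q
      · rw [if_pos h]
        refine ih _ _ (fun z hz => hl z (by simp [hz])) ?_
        intro p hp
        rcases List.mem_append.1 hp with hp | hp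
        · exact hd p hp
        · simp only [List.mem_singleton] at hp
          subst hp
          obtain ⟨h1, h2, h3, h4, _, h6⟩ := h
          exact ⟨hl p (by simp), h1, h2, h3, h4, h6⟩
      · rw [if_neg h]
        exact ih _ _ (fun z hz => hl z (by simp [hz])) hd
  exact key (pvDirs4 c) s [] (fun q hq => hq) (by simp)

-- after a scan every qualifying neighbour of the scanned cell is in the set
lemma pvSN_covers (n : Int) (board : List (List Int)) (s : PySem.Set (Int × Int)) (c : Int × Int) :
    ∀ nb ∈ pvDirs4 c, 0 ≤ nb.1 → nb.1 < n → 0 ≤ nb.2 → nb.2 < n →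
      pvGet2 board nb.1 nb.2 = some 0 → nb ∈ (pvSN n board s c).1 := by
  unfold pvSN
  have key : ∀ (l : List (Int × Int)) (s : PySem.Set (Int × Int)) (d : List (Int × Int)) (nb : Int × Int),
      nb ∈ l → 0 ≤ nb.1 → nb.1 < n → 0 ≤ nb.2 → nb.2 < n → pvGet2 board nb.1 nb.2 = some 0 →
      nb ∈ (l.foldl (fun t q => if pvC n board t.1 q then (PySem.Set.add t.1 q, t.2 ++ [q]) else t) (s, d)).1 := by
    intro l
    induction l with
    | nil => intro s d nb h; simp at h
    | cons q r ih =>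
      intro s d nb hmem h1 h2 h3 h4 h5
      simp only [List.foldl_cons]
      rcases List.mem_cons.1 hmem with rfl | hr
      · by_cases h : pvC n board s nb
        · rw [if_pos h]
          exact pvSN_mono n board r _ _ nb ((PySem.Set.mem_add s nb nb).2 (Or.inr rfl))
        · rw [if_neg h]
          have hin : nb ∈ s := by
            by_contra hns
            exact h ⟨h1, h2, h3, h4, hns, h5⟩
          exact pvSN_mono n board r _ _ nb hin
      · by_cases h : pvC n board s q
        · rw [if_pos h]; exact ih _ _ nb hr h1 h2 h3 h4 h5
        · rw [if_neg h]; exact ih _ _ nb hr h1 h2 h3 h4 h5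
  intro nb hmem h1 h2 h3 h4 h5
  exact key (pvDirs4 c) s [] nb hmem h1 h2 h3 h4 h5

-- ghost: A's traversal flattened to a single worklist (pure set/worklist view)
def pvBFlat (n : Int) (board : List (List Int)) (seen : PySem.Set (Int × Int))
    (order : List (Int × Int)) (q : List (Int × Int)) :
    PySem.Set (Int × Int) × List (Int × Int) :=
  match q with
  | [] => (seen, order)
  | c :: rest =>
    pvBFlat n board (pvSN n board seen c).1 (order ++ (pvSN n board seen c).2)
      (rest ++ (pvSN n board seen c).2)
termination_by 2 * pvZB board seen + q.length
decreasing_by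
  have h1 := pvSN_measure n board seen c
  simp only [List.length_append, List.length_cons]
  omega

lemma pvBFlat_order (n : Int) (board : List (List Int)) :
    ∀ (N : Nat) (q : List (Int × Int)) (s : PySem.Set (Int × Int)) (o1 o2 : List (Int × Int)),
      2 * pvZB board s + q.length ≤ N →
      pvBFlat n board s (o1 ++ o2) q
        = ((pvBFlat n board s o2 q).1, o1 ++ (pvBFlat n board s o2 q).2) := by
  intro N
  induction N with
  | zero =>
    intro q s o1 o2 h
    have : q = [] := by cases q <;> simp_all
    subst this
    simp [pvBFlat]
  | succ N ih =>
    intro q s o1 o2 h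
    cases q with
    | nil => simp [pvBFlat]
    | cons c rest =>
      rw [pvBFlat, pvBFlat]
      have hms := pvSN_measure n board s c
      have hmeas : 2 * pvZB board (pvSN n board s c).1 +
          (rest ++ (pvSN n board s c).2).length ≤ N := by
        simp only [List.length_append, List.length_cons] at h ⊢
        omega
      rw [show (o1 ++ o2) ++ (pvSN n board s c).2 = o1 ++ (o2 ++ (pvSN n board s c).2) by simp,
          ih _ _ _ _ hmeas, ih _ _ o2 (pvSN n board s c).2 hmeas]

lemma pvBFlat_mono (n : Int) (board : List (List Int)) :
    ∀ (N : Nat) (q : List (Int × Int)) (s : PySem.Set (Int × Int)) (o : List (Int × Int))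
      (x : Int × Int), 2 * pvZB board s + q.length ≤ N → x ∈ s →
      x ∈ (pvBFlat n board s o q).1 := by
  intro N
  induction N with
  | zero =>
    intro q s o x h hx
    have : q = [] := by cases q <;> simp_all
    subst this
    rw [pvBFlat]; exact hx
  | succ N ih =>
    intro q s o x h hx
    cases q with
    | nil => rw [pvBFlat]; exact hx
    | cons c rest =>
      rw [pvBFlat]
      have hms := pvSN_measure n board s c
      have hmeas : 2 * pvZB board (pvSN n board s c).1 +
          (rest ++ (pvSN n board s c).2).length ≤ N := by
        simp only [List.length_append, List.length_cons] at h ⊢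
        omega
      exact ih _ _ _ x hmeas ((pvSN_mem n board s c x).2 (Or.inl hx))

lemma pvBFlat_seenChar (n : Int) (board : List (List Int)) :
    ∀ (N : Nat) (q : List (Int × Int)) (s : PySem.Set (Int × Int)) (p : Int × Int),
      2 * pvZB board s + q.length ≤ N →
      (p ∈ (pvBFlat n board s [] q).1 ↔ p ∈ s ∨ p ∈ (pvBFlat n board s [] q).2) := by
  intro N
  induction N with
  | zero =>
    intro q s p h
    have : q = [] := by cases q <;> simp_all
    subst this
    rw [pvBFlat]; simp
  | succ N ih =>
    intro q s p h
    cases q with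
    | nil => rw [pvBFlat]; simp
    | cons c rest =>
      rw [pvBFlat]
      have hms := pvSN_measure n board s c
      have hmeas : 2 * pvZB board (pvSN n board s c).1 +
          (rest ++ (pvSN n board s c).2).length ≤ N := by
        simp only [List.length_append, List.length_cons] at h ⊢
        omega
      simp only [List.nil_append]
      have horder := pvBFlat_order n board N (rest ++ (pvSN n board s c).2)
        (pvSN n board s c).1 (pvSN n board s c).2 [] hmeas
      simp only [List.append_nil] at horder
      rw [horder]
      simp only [List.mem_append]
      rw [ih _ _ p hmeas, pvSN_mem n board s c p]
      tauto

lemma pvBFlat_sound (n : Int) (board : List (List Int)) (R : Int × Int → Prop)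
    (Hstep : ∀ p q, R p → q ∈ pvDirs4 p → 0 ≤ q.1 → q.1 < n → 0 ≤ q.2 → q.2 < n →
      pvGet2 board q.1 q.2 = some 0 → R q) :
    ∀ (N : Nat) (q : List (Int × Int)) (s : PySem.Set (Int × Int)) (o : List (Int × Int)),
      2 * pvZB board s + q.length ≤ N → (∀ p ∈ s, R p) → (∀ c ∈ q, R c) →
      ∀ p ∈ (pvBFlat n board s o q).1, R p := by
  intro N
  induction N with
  | zero =>
    intro q s o h hR _ p hp
    have : q = [] := by cases q <;> simp_all
    subst this
    rw [pvBFlat] at hp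
    exact hR p hp
  | succ N ih =>
    intro q s o h hR hq p hp
    cases q with
    | nil =>
      rw [pvBFlat] at hp
      exact hR p hp
    | cons c rest =>
      rw [pvBFlat] at hp
      have hms := pvSN_measure n board s c
      have hmeas : 2 * pvZB board (pvSN n board s c).1 +
          (rest ++ (pvSN n board s c).2).length ≤ N := by
        simp only [List.length_append, List.length_cons] at h ⊢
        omega
      have hRc : R c := hq c (by simp)
      have hnewR : ∀ z ∈ (pvSN n board s c).2, R z := by
        intro z hz
        obtain ⟨hd, h1, h2, h3, h4, h5⟩ := pvSN_new n board s c z hz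
        exact Hstep c z hRc hd h1 h2 h3 h4 h5
      have hR' : ∀ z ∈ (pvSN n board s c).1, R z := by
        intro z hz
        rcases (pvSN_mem n board s c z).1 hz with hz | hz
        · exact hR z hz
        · exact hnewR z hz
      have hq' : ∀ z ∈ rest ++ (pvSN n board s c).2, R z := by
        intro z hz
        rcases List.mem_append.1 hz with hz | hz
        · exact hq z (by simp [hz])
        · exact hnewR z hz
      exact ih _ _ _ hmeas hR' hq' p hp

lemma pvBFlat_closed (n : Int) (board : List (List Int)) :
    ∀ (N : Nat) (q : List (Int × Int)) (s : PySem.Set (Int × Int)) (o : List (Int × Int)),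
      2 * pvZB board s + q.length ≤ N →
      (∀ p ∈ s, (∀ nb ∈ pvDirs4 p, 0 ≤ nb.1 → nb.1 < n → 0 ≤ nb.2 → nb.2 < n →
          pvGet2 board nb.1 nb.2 = some 0 → nb ∈ s) ∨ p ∈ q) →
      ∀ p, (p ∈ (pvBFlat n board s o q).1 ∨ p ∈ q) → ∀ nb ∈ pvDirs4 p,
        0 ≤ nb.1 → nb.1 < n → 0 ≤ nb.2 → nb.2 < n → pvGet2 board nb.1 nb.2 = some 0 →
        nb ∈ (pvBFlat n board s o q).1 := by
  intro N
  induction N with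
  | zero =>
    intro q s o h hinv p hp nb hnb h1 h2 h3 h4 h5
    have : q = [] := by cases q <;> simp_all
    subst this
    rw [pvBFlat] at hp ⊢
    rcases hp with hp | hp
    · rcases hinv p hp with hcl | hq
      · exact hcl nb hnb h1 h2 h3 h4 h5
      · simp at hq
    · simp at hp
  | succ N ih =>
    intro q s o h hinv p hp nb hnb h1 h2 h3 h4 h5
    cases q with
    | nil =>
      rw [pvBFlat] at hp ⊢
      rcases hp with hp | hp
      · rcases hinv p hp with hcl | hq
        · exact hcl nb hnb h1 h2 h3 h4 h5
        · simp at hq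
      · simp at hp
    | cons c rest =>
      rw [pvBFlat] at hp ⊢
      have hms := pvSN_measure n board s c
      have hmeas : 2 * pvZB board (pvSN n board s c).1 +
          (rest ++ (pvSN n board s c).2).length ≤ N := by
        simp only [List.length_append, List.length_cons] at h ⊢
        omega
      have hinv' : ∀ z ∈ (pvSN n board s c).1,
          (∀ w ∈ pvDirs4 z, 0 ≤ w.1 → w.1 < n → 0 ≤ w.2 → w.2 < n →
            pvGet2 board w.1 w.2 = some 0 → w ∈ (pvSN n board s c).1) ∨
          z ∈ rest ++ (pvSN n board s c).2 := by
        intro z hz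
        rcases (pvSN_mem n board s c z).1 hz with hzs | hznew
        · rcases hinv z hzs with hcl | hzq
          · refine Or.inl ?_
            intro w hw w1 w2 w3 w4 w5
            exact (pvSN_mem n board s c w).2 (Or.inl (hcl w hw w1 w2 w3 w4 w5))
          · rcases List.mem_cons.1 hzq with rfl | hzrest
            · refine Or.inl ?_
              intro w hw w1 w2 w3 w4 w5
              exact pvSN_covers n board s z w hw w1 w2 w3 w4 w5
            · exact Or.inr (List.mem_append.2 (Or.inl hzrest))
        · exact Or.inr (List.mem_append.2 (Or.inr hznew))
      rcases hp with hp | hp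
      · exact ih _ _ _ hmeas hinv' p (Or.inl hp) nb hnb h1 h2 h3 h4 h5
      · rcases List.mem_cons.1 hp with rfl | hprest
        · -- p = c: its qualifying neighbours are in the scanned set, hence in the final set
          have : nb ∈ (pvSN n board s p).1 := pvSN_covers n board s p nb hnb h1 h2 h3 h4 h5
          exact pvBFlat_mono n board N _ _ _ nb hmeas this
        · exact ih _ _ _ hmeas hinv' p (Or.inr (List.mem_append.2 (Or.inl hprest))) nb hnb h1 h2 h3 h4 h5

-- every cell the worklist ever adds is an in-bounds zero cell
lemma pvBFlat_props (n : Int) (board : List (List Int)) :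
    ∀ (N : Nat) (q : List (Int × Int)) (s : PySem.Set (Int × Int)) (o : List (Int × Int)),
      2 * pvZB board s + q.length ≤ N →
      ∀ p ∈ (pvBFlat n board s o q).1,
        p ∈ s ∨ (0 ≤ p.1 ∧ p.1 < n ∧ 0 ≤ p.2 ∧ p.2 < n ∧ pvGet2 board p.1 p.2 = some 0) := by
  intro N
  induction N with
  | zero =>
    intro q s o h p hp
    have : q = [] := by cases q <;> simp_all
    subst this
    rw [pvBFlat] at hp
    exact Or.inl hp
  | succ N ih =>
    intro q s o h p hp
    cases q with
    | nil =>
      rw [pvBFlat] at hp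
      exact Or.inl hp
    | cons c rest =>
      rw [pvBFlat] at hp
      have hms := pvSN_measure n board s c
      have hmeas : 2 * pvZB board (pvSN n board s c).1 +
          (rest ++ (pvSN n board s c).2).length ≤ N := by
        simp only [List.length_append, List.length_cons] at h ⊢
        omega
      rcases ih _ _ _ hmeas p hp with hin | hb
      · rcases (pvSN_mem n board s c p).1 hin with hin | hin
        · exact Or.inl hin
        · obtain ⟨_, h1, h2, h3, h4, h5⟩ := pvSN_new n board s c p hin
          exact Or.inr ⟨h1, h2, h3, h4, h5⟩
      · exact Or.inr hb

-- ======== rebuild board lemmas ========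

-- reading a cell of the rebuilt board
lemma pvGet2_rebuild (board : List (List Int)) (s : PySem.Set (Int × Int)) (i j : Int)
    (hi : 0 ≤ i) (hj : 0 ≤ j) :
    pvGet2 (pvRebuild board s) i j
      = (pvGet2 board i j).map (fun w => if (i, j) ∈ s then 1 else w) := by
  unfold pvGet2 pvRebuild
  rw [PySem.List.pyGet?_of_nonneg _ hi, PySem.List.pyGet?_of_nonneg _ hi,
      List.getElem?_mapIdx]
  rcases hrow : board[i.toNat]? with _ | row
  · simp
  · simp only [Option.map_some, Option.bind_some]
    rw [PySem.List.pyGet?_of_nonneg _ hj, PySem.List.pyGet?_of_nonneg _ hj,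
        List.getElem?_mapIdx]
    rcases hc : row[j.toNat]? with _ | v
    · simp
    · simp [Int.toNat_of_nonneg hi, Int.toNat_of_nonneg hj]

-- writing 1 at a cell of the rebuilt board visits it
lemma pvSet2_rebuild (board : List (List Int)) (s : PySem.Set (Int × Int)) (i j : Int)
    (hi : 0 ≤ i) (hj : 0 ≤ j) (w : Int) (h : pvGet2 board i j = some w) :
    pvSet2 (pvRebuild board s) i j 1 = pvRebuild board (PySem.Set.add s (i, j)) := by
  rcases Option.bind_eq_some_iff.1 h with ⟨row, hrow, hcell⟩
  rw [PySem.List.pyGet?_of_nonneg _ hi] at hrow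
  rw [PySem.List.pyGet?_of_nonneg _ hj] at hcell
  have hilen : i.toNat < board.length := by
    rcases Nat.lt_or_ge i.toNat board.length with h' | h'
    · exact h'
    · rw [List.getElem?_eq_none h'] at hrow; cases hrow
  have hjlen : j.toNat < row.length := by
    rcases Nat.lt_or_ge j.toNat row.length with h' | h'
    · exact h'
    · rw [List.getElem?_eq_none h'] at hcell; cases hcell
  have hrow' : board[i.toNat] = row := by simpa [List.getElem?_eq_getElem hilen] using hrow
  have hrbrow : (pvRebuild board s)[i.toNat]? =
      some (row.mapIdx (fun j' v => if ((i.toNat : Int), (j' : Int)) ∈ s then 1 else v)) := by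
    unfold pvRebuild
    rw [List.getElem?_mapIdx, List.getElem?_eq_getElem hilen, hrow']
    rfl
  have hiC : (i : Int) = ((i.toNat : Nat) : Int) := by omega
  have hjC : (j : Int) = ((j.toNat : Nat) : Int) := by omega
  have hset : pvSet2 (pvRebuild board s) i j 1 =
      (pvRebuild board s).set i.toNat
        ((row.mapIdx (fun j' v => if ((i.toNat : Int), (j' : Int)) ∈ s then 1 else v)).set j.toNat 1) := by
    unfold pvSet2
    rw [PySem.List.pyGet?_of_nonneg _ hi, hrbrow]
    show (PySem.List.pySet? (pvRebuild board s) i (PySem.List.pySetD _ j 1)).getD _ = _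
    unfold PySem.List.pySetD
    rw [hjC, PySem.List.pySet?_natCast _ _ _ (by simpa using hjlen)]
    rw [hiC, PySem.List.pySet?_natCast _ _ _ (by
      unfold pvRebuild; simpa using hilen)]
    simp only [Option.getD_some, Int.toNat_natCast]
  rw [hset]
  apply List.ext_getElem?
  intro k
  unfold pvRebuild
  by_cases hk : k = i.toNat
  · subst hk
    rw [List.getElem?_set_self' ]
    rw [List.getElem?_mapIdx, List.getElem?_mapIdx, List.getElem?_eq_getElem hilen, hrow']
    simp only [Option.map_eq_map, Option.map_some, Function.const_apply]
    congr 1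
    apply List.ext_getElem?
    intro m
    rw [List.getElem?_mapIdx]
    by_cases hm : m = j.toNat
    · subst hm
      rw [List.getElem?_set_self' ]
      rw [List.getElem?_mapIdx, List.getElem?_eq_getElem hjlen]
      simp only [Option.map_eq_map, Option.map_some, Function.const_apply]
      have : ((i.toNat : Int), (j.toNat : Int)) ∈ PySem.Set.add s (i, j) := by
        rw [PySem.Set.mem_add]
        right
        simp [Int.toNat_of_nonneg hi, Int.toNat_of_nonneg hj]
      rw [if_pos this]
    · rw [List.getElem?_set_ne (by omega), List.getElem?_mapIdx]
      rcases hv : row[m]? with _ | v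
      · simp
      · simp only [Option.map_some]
        have : (((i.toNat : Int), (m : Int)) ∈ PySem.Set.add s (i, j)) ↔
            (((i.toNat : Int), (m : Int)) ∈ s) := by
          rw [PySem.Set.mem_add]
          constructor
          · rintro (hs | he)
            · exact hs
            · exfalso
              have := congrArg Prod.snd he
              simp only at this
              omega
          · exact Or.inl
        simp only [this]
  · rw [List.getElem?_set_ne (by omega), List.getElem?_mapIdx, List.getElem?_mapIdx]
    rcases hr : board[k]? with _ | r
    · simp
    · simp only [Option.map_some]
      congr 1
      apply List.ext_getElem?
      intro m
      rw [List.getElem?_mapIdx, List.getElem?_mapIdx]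
      rcases hv : r[m]? with _ | v
      · simp
      · simp only [Option.map_some]
        have : (((k : Int), (m : Int)) ∈ PySem.Set.add s (i, j)) ↔
            (((k : Int), (m : Int)) ∈ s) := by
          rw [PySem.Set.mem_add]
          constructor
          · rintro (hs | he)
            · exact hs
            · exfalso
              have := congrArg Prod.fst he
              simp only at this
              omega
          · exact Or.inl
        simp only [this]

lemma pvRebuild_nil (board : List (List Int)) :
    pvRebuild board PySem.Set.empty = board := by
  unfold pvRebuild
  apply List.ext_getElem?
  intro k
  rw [List.getElem?_mapIdx]
  rcases hr : board[k]? with _ | r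
  · simp
  · simp only [Option.map_some]
    congr 1
    apply List.ext_getElem?
    intro m
    rw [List.getElem?_mapIdx]
    rcases hv : r[m]? with _ | v
    · simp
    · simp [PySem.Set.empty]

-- rebuilding depends only on membership
lemma pvRebuild_congr (board : List (List Int)) (s s' : PySem.Set (Int × Int))
    (h : ∀ p : Int × Int, p ∈ s ↔ p ∈ s') : pvRebuild board s = pvRebuild board s' := by
  unfold pvRebuild
  apply List.ext_getElem?
  intro k
  rw [List.getElem?_mapIdx, List.getElem?_mapIdx]
  rcases hr : board[k]? with _ | r
  · simp
  · simp only [Option.map_some]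
    congr 1
    apply List.ext_getElem?
    intro m
    rw [List.getElem?_mapIdx, List.getElem?_mapIdx]
    rcases hv : r[m]? with _ | v
    · simp
    · simp only [Option.map_some]
      by_cases hm : ((k : Int), (m : Int)) ∈ s
      · rw [if_pos hm, if_pos ((h _).1 hm)]
      · rw [if_neg hm, if_neg (fun hc => hm ((h _).2 hc))]

-- one neighbour probe of A on a rebuilt board, in terms of the shared condition
lemma pvADir_eq (n : Int) (board : List (List Int)) (s : PySem.Set (Int × Int))
    (q : List (Int × Int)) (p : Int × Int) :
    pvADir (n - 1) (pvRebuild board s, q) p.1 p.2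
      = if pvC n board s p then (pvRebuild board (PySem.Set.add s p), q ++ [p])
        else (pvRebuild board s, q) := by
  unfold pvADir
  by_cases hb : 0 ≤ p.1 ∧ p.1 < n ∧ 0 ≤ p.2 ∧ p.2 < n
  · rw [if_neg (by omega)]
    rw [pvGet2_rebuild board s p.1 p.2 hb.1 hb.2.2.1]
    by_cases hC : pvC n board s p
    · rw [if_pos hC]
      obtain ⟨_, _, _, _, hm, hg⟩ := hC
      rw [hg]
      simp only [Option.map_some, if_neg hm]
      simp only [if_true]
      rw [pvSet2_rebuild board s p.1 p.2 hb.1 hb.2.2.1 0 hg]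
    · rw [if_neg hC]
      rcases hg : pvGet2 board p.1 p.2 with _ | v
      · simp
      · simp only [Option.map_some]
        by_cases hm : (p.1, p.2) ∈ s
        · rw [if_pos hm]
          norm_num
        · rw [if_neg hm]
          have hv : ¬ v = 0 := by
            intro hv
            subst hv
            exact hC ⟨hb.1, hb.2.1, hb.2.2.1, hb.2.2.2, hm, hg⟩
          rw [if_neg hv]
  · rw [if_pos (by omega), if_neg (by unfold pvC; omega)]

-- A's four-direction scan equals the ghost scan on a rebuilt board
lemma pvAStep_eq (n : Int) (board : List (List Int)) (s : PySem.Set (Int × Int))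
    (q : List (Int × Int)) (i j : Int) :
    (PySem.List.pyRange 0 4 1).foldl
        (fun st k => pvADir (n - 1) st (i + PySem.List.pyGetD pvDi k 0) (j + PySem.List.pyGetD pvDj k 0))
        (pvRebuild board s, q)
      = (pvRebuild board (pvSN n board s (i, j)).1, q ++ (pvSN n board s (i, j)).2) := by
  have hr : PySem.List.pyRange 0 4 1 = [0, 1, 2, 3] := by decide
  have hmap : ([0, 1, 2, 3] : List Int).map
      (fun k => (i + PySem.List.pyGetD pvDi k 0, j + PySem.List.pyGetD pvDj k 0)) = pvDirs4 (i, j) := by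
    have d0 : PySem.List.pyGetD pvDi 0 0 = -1 := by decide
    have d1 : PySem.List.pyGetD pvDi 1 0 = 1 := by decide
    have d2 : PySem.List.pyGetD pvDi 2 0 = 0 := by decide
    have d3 : PySem.List.pyGetD pvDi 3 0 = 0 := by decide
    have e0 : PySem.List.pyGetD pvDj 0 0 = 0 := by decide
    have e1 : PySem.List.pyGetD pvDj 1 0 = 0 := by decide
    have e2 : PySem.List.pyGetD pvDj 2 0 = -1 := by decide
    have e3 : PySem.List.pyGetD pvDj 3 0 = 1 := by decide
    simp only [List.map_cons, List.map_nil, pvDirs4, d0, d1, d2, d3, e0, e1, e2, e3]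
    norm_num
    omega
  have hfold : (PySem.List.pyRange 0 4 1).foldl
      (fun st k => pvADir (n - 1) st (i + PySem.List.pyGetD pvDi k 0) (j + PySem.List.pyGetD pvDj k 0))
      (pvRebuild board s, q)
    = (pvDirs4 (i, j)).foldl (fun st p => pvADir (n - 1) st p.1 p.2) (pvRebuild board s, q) := by
    rw [hr, ← hmap, List.foldl_map]
  rw [hfold]
  unfold pvSN
  have key : ∀ (l : List (Int × Int)) (s : PySem.Set (Int × Int)) (q : List (Int × Int)),
      l.foldl (fun st p => pvADir (n - 1) st p.1 p.2) (pvRebuild board s, q)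
        = ((pvRebuild board (l.foldl (fun t p => if pvC n board t.1 p then (PySem.Set.add t.1 p, t.2 ++ [p]) else t) (s, [])).1),
           q ++ (l.foldl (fun t p => if pvC n board t.1 p then (PySem.Set.add t.1 p, t.2 ++ [p]) else t) (s, [])).2) := by
    intro l
    induction l with
    | nil => intro s q; simp
    | cons p r ih =>
      intro s q
      simp only [List.foldl_cons]
      rw [pvADir_eq n board s q p]
      by_cases h : pvC n board s p
      · rw [if_pos h, if_pos h]
        rw [ih (PySem.Set.add s p) (q ++ [p])]
        simp only [List.nil_append]
        rw [pvSN_thread n board r (PySem.Set.add s p) [p]]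
        simp
      · rw [if_neg h, if_neg h]
        exact ih s q
  exact key (pvDirs4 (i, j)) s q

-- the two loops run in lockstep
lemma pvMain (board : List (List Int)) (n : Int) :
    ∀ (N : Nat) (q : List (Int × Int)) (s : PySem.Set (Int × Int))
      (mm : Option Int × Option Int × Int × Int),
      2 * pvZB board s + q.length ≤ N →
      pvALoop (n - 1) (pvRebuild board s) q mm
        = (pvRebuild board (pvBFlat n board s [] q).1,
           List.foldl pvMM mm (q ++ (pvBFlat n board s [] q).2)) := by
  intro N
  induction N with
  | zero =>
    intro q s mm h
    have : q = [] := by cases q <;> simp_all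
    subst this
    simp [pvALoop, pvBFlat]
  | succ N ih =>
    intro q s mm h
    cases q with
    | nil => simp [pvALoop, pvBFlat]
    | cons c rest =>
      obtain ⟨i, j⟩ := c
      rw [pvALoop]
      rw [pvAStep_eq n board s rest i j]
      have hms := pvSN_measure n board s (i, j)
      have hmeas : 2 * pvZB board (pvSN n board s (i, j)).1 +
          (rest ++ (pvSN n board s (i, j)).2).length ≤ N := by
        simp only [List.length_append, List.length_cons] at h ⊢
        omega
      rw [ih _ _ (pvMM mm (i, j)) hmeas]
      rw [pvBFlat]
      simp only [List.nil_append]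
      have horder := pvBFlat_order n board N (rest ++ (pvSN n board s (i, j)).2)
        (pvSN n board s (i, j)).1 (pvSN n board s (i, j)).2 [] (by simpa using hmeas)
      simp only [List.append_nil] at horder
      rw [horder]
      simp [List.append_assoc]

-- the incremental min/max fold, once seeded
lemma pvMM_fold (l : List (Int × Int)) :
    ∀ (a b c d : Int),
      List.foldl pvMM (some a, some b, c, d) l
        = (some (List.foldl min a (l.map Prod.snd)), some (List.foldl min b (l.map Prod.fst)),
           List.foldl max c (l.map Prod.snd), List.foldl max d (l.map Prod.fst)) := by
  induction l with
  | nil => intro a b c d; simp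
  | cons p r ih =>
    intro a b c d
    obtain ⟨i, j⟩ := p
    simp only [List.foldl_cons, List.map_cons]
    have hx : ∀ (u v : Int), (if pvLtO u (some v) = true then some u else some v) = some (min v u) := by
      intro u v
      simp only [pvLtO, decide_eq_true_eq]
      split_ifs with h <;> (congr 1; omega)
    have hy : ∀ (u v : Int), (if v < u then u else v) = max v u := by
      intro u v
      split_ifs with h <;> omega
    have hstep : pvMM (some a, some b, c, d) (i, j) = (some (min a j), some (min b i), max c j, max d i) := by
      simp only [pvMM]
      simp only [hx, hy]
    rw [hstep, ih]

lemma pvMM_seed' (i j : Int) :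
    pvMM (none, none, -1, -1) (i, j) = (some j, some i, max (-1) j, max (-1) i) := by
  simp only [pvMM, pvLtO]
  norm_num
  constructor <;> (split_ifs with h <;> omega)

lemma pvMM_fold_cons (p0 : Int × Int) (rest : List (Int × Int)) :
    List.foldl pvMM (none, none, -1, -1) (p0 :: rest)
      = (some (List.foldl min p0.2 (rest.map Prod.snd)), some (List.foldl min p0.1 (rest.map Prod.fst)),
         List.foldl max (max (-1) p0.2) (rest.map Prod.snd), List.foldl max (max (-1) p0.1) (rest.map Prod.fst)) := by
  rw [List.foldl_cons, show pvMM (none, none, -1, -1) p0 = (some p0.2, some p0.1, max (-1) p0.2, max (-1) p0.1) from pvMM_seed' p0.1 p0.2, pvMM_fold]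

-- min/max running folds depend only on the seed and the members of the list
lemma pvFoldMin_eq (a : Int) (L1 L2 : List Int) (h : ∀ z : Int, z ∈ L1 ↔ z ∈ L2) :
    L1.foldl min a = L2.foldl min a := by
  have le1 : L2.foldl min a ≤ L1.foldl min a := by
    rcases PySem.List.foldl_min_mem L1 a with heq | hm
    · rw [heq]; exact (PySem.List.foldl_min_le L2 a).1
    · exact (PySem.List.foldl_min_le L2 a).2 _ ((h _).1 hm)
  have le2 : L1.foldl min a ≤ L2.foldl min a := by
    rcases PySem.List.foldl_min_mem L2 a with heq | hm
    · rw [heq]; exact (PySem.List.foldl_min_le L1 a).1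
    · exact (PySem.List.foldl_min_le L1 a).2 _ ((h _).2 hm)
  omega

lemma pvFoldMax_eq (a : Int) (L1 L2 : List Int) (h : ∀ z : Int, z ∈ L1 ↔ z ∈ L2) :
    L1.foldl max a = L2.foldl max a := by
  have le1 : L1.foldl max a ≤ L2.foldl max a := by
    rcases PySem.List.foldl_max_mem L1 a with heq | hm
    · rw [heq]; exact (PySem.List.le_foldl_max L2 a).1
    · exact (PySem.List.le_foldl_max L2 a).2 _ ((h _).1 hm)
  have le2 : L2.foldl max a ≤ L1.foldl max a := by
    rcases PySem.List.foldl_max_mem L2 a with heq | hm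
    · rw [heq]; exact (PySem.List.le_foldl_max L1 a).1
    · exact (PySem.List.le_foldl_max L1 a).2 _ ((h _).2 hm)
  omega

-- the marked start cell can never read back as 0
lemma pvGet2_set2_one_ne (g : List (List Int)) (i j : Int) :
    ¬ pvGet2 (pvSet2 g i j 1) i j = some 0 := by
  unfold pvGet2 pvSet2
  rcases hr : PySem.List.pyGet? g i with _ | row
  · rw [hr]
    simp
  · simp only [PySem.List.pyGet?] at hr
    rcases hk : PySem.List.pyIdx? g.length i with _ | k
    · rw [hk] at hr; simp at hr
    · rw [hk] at hr
      have hgk : g[k]? = some row := by simpa using hr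
      have hklen : k < g.length := by
        rcases Nat.lt_or_ge k g.length with h | h
        · exact h
        · rw [List.getElem?_eq_none h] at hgk; cases hgk
      have hset : PySem.List.pySetD g i (PySem.List.pySetD row j 1)
          = g.set k (PySem.List.pySetD row j 1) := by
        unfold PySem.List.pySetD PySem.List.pySet?
        rw [hk]
        rfl
      show ¬ (PySem.List.pyGet? (PySem.List.pySetD g i (PySem.List.pySetD row j 1)) i).bind
        (fun r => PySem.List.pyGet? r j) = some 0
      rw [hset]
      have h1 : PySem.List.pyGet? (g.set k (PySem.List.pySetD row j 1)) i
          = some (PySem.List.pySetD row j 1) := by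
        simp only [PySem.List.pyGet?, List.length_set]
        rw [hk]
        simp only [Option.bind_some]
        rw [List.getElem?_set_self', hgk]
        rfl
      rw [h1]
      simp only [Option.bind_some]
      rcases hm : PySem.List.pyIdx? row.length j with _ | m
      · have hid : PySem.List.pySetD row j 1 = row := by
          unfold PySem.List.pySetD PySem.List.pySet?
          rw [hm]
          rfl
        rw [hid]
        simp only [PySem.List.pyGet?]
        rw [hm]
        simp
      · have hid : PySem.List.pySetD row j 1 = row.set m 1 := by
          unfold PySem.List.pySetD PySem.List.pySet?
          rw [hm]
          rfl
        rw [hid]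
        simp only [PySem.List.pyGet?, List.length_set]
        rw [hm]
        simp only [Option.bind_some]
        rw [List.getElem?_set_self']
        rcases row[m]? with _ | v <;> simp

-- ======== B-side (sweep) lemmas ========

-- set-level firing condition of one sweep probe (cp = pvRebuild b' D, seen = s0 :: D)
abbrev pvC2 (b' : List (List Int)) (s0 : Int × Int) (D : PySem.Set (Int × Int)) (i j : Int) : Prop :=
  pvGet2 b' i j = some 0 ∧ ¬ (i, j) ∈ D ∧
    ((i - 1, j) ∈ s0 :: D ∨ (i + 1, j) ∈ s0 :: D ∨ (i, j - 1) ∈ s0 :: D ∨ (i, j + 1) ∈ s0 :: D)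

-- ghost: one sweep on the visited-set level
def gRow (n : Int) (b' : List (List Int)) (s0 : Int × Int)
    (t : PySem.Set (Int × Int) × Bool) (i : Int) : PySem.Set (Int × Int) × Bool :=
  (pvRowIdx n b' i).foldl
    (fun t j => if pvC2 b' s0 t.1 i j then (PySem.Set.add t.1 (i, j), true) else t) t

def gSweep (n : Int) (b' : List (List Int)) (s0 : Int × Int) (D : PySem.Set (Int × Int)) :
    PySem.Set (Int × Int) × Bool :=
  (PySem.List.pyRange 0 n 1).foldl (gRow n b' s0) (D, false)

lemma gSweep_decr (n : Int) (b' : List (List Int)) (s0 : Int × Int) (D : PySem.Set (Int × Int))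
    (h : (gSweep n b' s0 D).2 = true) : pvZB b' (gSweep n b' s0 D).1 < pvZB b' D := by
  have main : (fun t : PySem.Set (Int × Int) × Bool =>
      pvZB b' t.1 ≤ pvZB b' D ∧ (t.2 = true → pvZB b' t.1 < pvZB b' D)) (gSweep n b' s0 D) := by
    unfold gSweep
    refine pvFoldPresMem (fun t : PySem.Set (Int × Int) × Bool =>
      pvZB b' t.1 ≤ pvZB b' D ∧ (t.2 = true → pvZB b' t.1 < pvZB b' D)) _ _ ?_ _ ⟨le_refl _, by simp⟩
    intro t i hi hP
    unfold gRow
    refine pvFoldPresMem (fun t : PySem.Set (Int × Int) × Bool =>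
      pvZB b' t.1 ≤ pvZB b' D ∧ (t.2 = true → pvZB b' t.1 < pvZB b' D)) _ _ ?_ _ hP
    intro t2 j hj hP2
    have hi' := (PySem.List.mem_pyRange_one).1 hi
    have hj' := (PySem.List.mem_pyRange_one).1 hj
    split_ifs with hc
    · obtain ⟨hg, hns, _⟩ := hc
      have := pvZB_add_lt b' t2.1 (i, j) (by omega) (by omega) hg hns
      obtain ⟨hP2a, _⟩ := hP2
      constructor
      · show pvZB b' (PySem.Set.add t2.1 (i, j)) ≤ pvZB b' D
        omega
      · intro _
        show pvZB b' (PySem.Set.add t2.1 (i, j)) < pvZB b' D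
        omega
    · exact hP2
  exact main.2 h

def gLoop (n : Int) (b' : List (List Int)) (s0 : Int × Int) (D : PySem.Set (Int × Int)) :
    PySem.Set (Int × Int) :=
  if (gSweep n b' s0 D).2 = true then gLoop n b' s0 (gSweep n b' s0 D).1
  else (gSweep n b' s0 D).1
termination_by pvZB b' D
decreasing_by exact gSweep_decr n b' s0 D (by assumption)

-- row lengths survive rebuilding, so the scanned index range does too
lemma pvRowIdx_rebuild (n : Int) (b' : List (List Int)) (D : PySem.Set (Int × Int)) (i : Int) :
    pvRowIdx n (pvRebuild b' D) i = pvRowIdx n b' i := by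
  unfold pvRowIdx
  have hlen : (pvRebuild b' D).length = b'.length := by
    unfold pvRebuild
    simp
  simp only [PySem.List.pyGet?, hlen]
  rcases hk : PySem.List.pyIdx? b'.length i with _ | k
  · simp
  · simp only [Option.bind_some]
    unfold pvRebuild
    rw [List.getElem?_mapIdx]
    rcases hr : b'[k]? with _ | r
    · simp
    · simp

-- appending a fresh element to the seen set keeps the start cell at the head
lemma pvAdd_cons (s0 : Int × Int) (D : PySem.Set (Int × Int)) (p : Int × Int)
    (h : ¬ p ∈ s0 :: D) : PySem.Set.add (s0 :: D) p = s0 :: PySem.Set.add D p := by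
  have hD : ¬ p ∈ D := fun hc => h (List.mem_cons_of_mem _ hc)
  unfold PySem.Set.add
  rw [if_neg (by simpa using h), if_neg (by simpa using hD)]
  rfl

-- one row of the port's sweep simulates the ghost row (cp = rebuild, seen = s0 :: D)
lemma pvRow_sim (b' : List (List Int)) (s0 : Int × Int)
    (hs0 : ¬ pvGet2 b' s0.1 s0.2 = some 0) (i : Int) (hi : 0 ≤ i) :
    ∀ (l : List Int), (∀ j ∈ l, 0 ≤ j) → ∀ (D : PySem.Set (Int × Int)) (flag : Bool),
      l.foldl (pvSwStep i) (pvRebuild b' D, s0 :: D, flag)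
        = (pvRebuild b' (l.foldl (fun t j => if pvC2 b' s0 t.1 i j then (PySem.Set.add t.1 (i, j), true) else t) (D, flag)).1,
           s0 :: (l.foldl (fun t j => if pvC2 b' s0 t.1 i j then (PySem.Set.add t.1 (i, j), true) else t) (D, flag)).1,
           (l.foldl (fun t j => if pvC2 b' s0 t.1 i j then (PySem.Set.add t.1 (i, j), true) else t) (D, flag)).2) := by
  intro l
  induction l with
  | nil => intro _ D flag; simp
  | cons j r ih =>
    intro hl D flag
    have hj : (0 : Int) ≤ j := hl j (by simp)
    simp only [List.foldl_cons]
    by_cases hC : pvC2 b' s0 D i j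
    · obtain ⟨hg, hns, hnb⟩ := hC
      have hstep : pvSwStep i (pvRebuild b' D, s0 :: D, flag) j
          = (pvRebuild b' (PySem.Set.add D (i, j)), s0 :: PySem.Set.add D (i, j), true) := by
        unfold pvSwStep
        rw [if_pos ?_]
        · have hmark := pvSet2_rebuild b' D i j hi hj 0 hg
          show (pvSet2 (pvRebuild b' D) i j 1, PySem.Set.add (s0 :: D) (i, j), true) = _
          rw [hmark]
          have hne : ¬ ((i, j) : Int × Int) ∈ s0 :: D := by
            intro hc
            rcases List.mem_cons.1 hc with he | hc
            · rw [← he] at hs0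
              exact hs0 hg
            · exact hns hc
          rw [pvAdd_cons s0 D (i, j) hne]
        · constructor
          · show pvGet2 (pvRebuild b' D) i j = some 0
            rw [pvGet2_rebuild b' D i j hi hj, hg]
            simp [hns]
          · exact hnb
      rw [hstep]
      rw [if_pos ⟨hg, hns, hnb⟩]
      exact ih (fun w hw => hl w (by simp [hw])) (PySem.Set.add D (i, j)) true
    · have hstep : pvSwStep i (pvRebuild b' D, s0 :: D, flag) j
          = (pvRebuild b' D, s0 :: D, flag) := by
        unfold pvSwStep
        rw [if_neg ?_]
        rintro ⟨hg, hnb⟩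
        replace hg : pvGet2 (pvRebuild b' D) i j = some 0 := hg
        rw [pvGet2_rebuild b' D i j hi hj] at hg
        rcases hg0 : pvGet2 b' i j with _ | v
        · rw [hg0] at hg; simp at hg
        · rw [hg0] at hg
          simp only [Option.map_some, Option.some_inj] at hg
          by_cases hm : ((i, j) : Int × Int) ∈ D
          · rw [if_pos hm] at hg
            exact absurd hg (by norm_num)
          · rw [if_neg hm] at hg
            subst hg
            exact hC ⟨hg0, hm, hnb⟩
      rw [hstep]
      rw [if_neg hC]
      exact ih (fun w hw => hl w (by simp [hw])) D flag

-- the port's sweep simulates the ghost sweep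
lemma pvSweep_sim (n : Int) (b' : List (List Int)) (s0 : Int × Int)
    (hs0 : ¬ pvGet2 b' s0.1 s0.2 = some 0) (D : PySem.Set (Int × Int)) :
    pvSweep n (pvRebuild b' D) (s0 :: D)
      = (pvRebuild b' (gSweep n b' s0 D).1, s0 :: (gSweep n b' s0 D).1, (gSweep n b' s0 D).2) := by
  unfold pvSweep gSweep
  have key : ∀ (L : List Int), (∀ i ∈ L, 0 ≤ i) → ∀ (D : PySem.Set (Int × Int)) (flag : Bool),
      L.foldl (fun st i => (pvRowIdx n st.1 i).foldl (pvSwStep i) st) (pvRebuild b' D, s0 :: D, flag)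
        = (pvRebuild b' (L.foldl (gRow n b' s0) (D, flag)).1,
           s0 :: (L.foldl (gRow n b' s0) (D, flag)).1, (L.foldl (gRow n b' s0) (D, flag)).2) := by
    intro L
    induction L with
    | nil => intro _ D flag; simp
    | cons i L' ih =>
      intro hL D flag
      have hi : (0 : Int) ≤ i := hL i (by simp)
      simp only [List.foldl_cons]
      have hridx : pvRowIdx n ((pvRebuild b' D, s0 :: D, flag) :
          List (List Int) × PySem.Set (Int × Int) × Bool).1 i = pvRowIdx n b' i :=
        pvRowIdx_rebuild n b' D i
      rw [hridx]
      rw [pvRow_sim b' s0 hs0 i hi (pvRowIdx n b' i)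
        (fun j hj => ((PySem.List.mem_pyRange_one).1 hj).1) D flag]
      rw [show gRow n b' s0 (D, flag) i
          = ((pvRowIdx n b' i).foldl (fun t j => if pvC2 b' s0 t.1 i j then (PySem.Set.add t.1 (i, j), true) else t) (D, flag)) from rfl]
      exact ih (fun w hw => hL w (by simp [hw])) _ _
  exact key (PySem.List.pyRange 0 n 1) (fun i hi => ((PySem.List.mem_pyRange_one).1 hi).1) D false

lemma pvSweepLoop_sim (n : Int) (b' : List (List Int)) (s0 : Int × Int)
    (hs0 : ¬ pvGet2 b' s0.1 s0.2 = some 0) :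
    ∀ (N : Nat) (D : PySem.Set (Int × Int)), pvZB b' D ≤ N →
      pvSweepLoop n (pvRebuild b' D) (s0 :: D)
        = (pvRebuild b' (gLoop n b' s0 D), s0 :: gLoop n b' s0 D) := by
  intro N
  induction N with
  | zero =>
    intro D h
    rw [pvSweepLoop, gLoop, pvSweep_sim n b' s0 hs0 D]
    split_ifs with hfl
    · exact absurd (gSweep_decr n b' s0 D hfl) (by omega)
    · rfl
  | succ N ih =>
    intro D h
    rw [pvSweepLoop, gLoop, pvSweep_sim n b' s0 hs0 D]
    split_ifs with hfl
    · have := gSweep_decr n b' s0 D hfl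
      exact ih _ (by omega)
    · rfl

-- ghost sweep: monotone, sound, complete at a fixpoint
lemma gSweep_sound (n : Int) (b' : List (List Int)) (s0 : Int × Int) (R : Int × Int → Prop)
    (Hstep : ∀ p q, R p → q ∈ pvDirs4 p → 0 ≤ q.1 → q.1 < n → 0 ≤ q.2 → q.2 < n →
      pvGet2 b' q.1 q.2 = some 0 → R q)
    (hRs0 : R s0) (D : PySem.Set (Int × Int)) (hR : ∀ p ∈ D, R p) :
    ∀ p ∈ (gSweep n b' s0 D).1, R p := by
  unfold gSweep
  refine pvFoldPresMem (fun t : PySem.Set (Int × Int) × Bool => ∀ p ∈ t.1, R p) _ _ ?_ _ hR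
  intro t i hi hP
  have hi' := (PySem.List.mem_pyRange_one).1 hi
  unfold gRow
  refine pvFoldPresMem (fun t : PySem.Set (Int × Int) × Bool => ∀ p ∈ t.1, R p) _ _ ?_ _ hP
  intro t2 j hj hP2
  have hj' := (PySem.List.mem_pyRange_one).1 hj
  split_ifs with hc
  · obtain ⟨hg, _, hnbr⟩ := hc
    have hjn : j < n := by
      have := hj'.2
      omega
    have hnew : R (i, j) := by
      have hex : ∃ par, par ∈ s0 :: t2.1 ∧ par ∈ pvDirs4 (i, j) := by
        rcases hnbr with h | h | h | h
        · exact ⟨(i - 1, j), h, by simp [pvDirs4]⟩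
        · exact ⟨(i + 1, j), h, by simp [pvDirs4]⟩
        · exact ⟨(i, j - 1), h, by simp [pvDirs4]⟩
        · exact ⟨(i, j + 1), h, by simp [pvDirs4]⟩
      obtain ⟨par, hpar, hdir⟩ := hex
      have hRpar : R par := by
        rcases List.mem_cons.1 hpar with rfl | hparD
        · exact hRs0
        · exact hP2 par hparD
      exact Hstep par (i, j) hRpar ((pvDirs4_symm (i, j) par).1 hdir)
        (by omega) (by omega) (by omega) hjn hg
    intro p hp
    rcases (PySem.Set.mem_add t2.1 (i, j) p).1 hp with hp | rfl
    · exact hP2 p hp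
    · exact hnew
  · exact hP2

-- a sweep that reports no change left the set unchanged and fired no condition
lemma gInner_false (b' : List (List Int)) (s0 : Int × Int) (i : Int) (l : List Int) :
    ∀ (acc : PySem.Set (Int × Int) × Bool),
      (l.foldl (fun t j => if pvC2 b' s0 t.1 i j then (PySem.Set.add t.1 (i, j), true) else t) acc).2 = false →
      acc.2 = false ∧
      (l.foldl (fun t j => if pvC2 b' s0 t.1 i j then (PySem.Set.add t.1 (i, j), true) else t) acc).1 = acc.1 ∧
      ∀ j ∈ l, ¬ pvC2 b' s0 acc.1 i j := by
  induction l with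
  | nil => intro acc h; exact ⟨h, rfl, by simp⟩
  | cons j r ih =>
    intro acc h
    simp only [List.foldl_cons] at h ⊢
    by_cases hc : pvC2 b' s0 acc.1 i j
    · exfalso
      rw [if_pos hc] at h
      have := (ih _ h).1
      simp at this
    · rw [if_neg hc] at h ⊢
      obtain ⟨h1, h2, h3⟩ := ih acc h
      refine ⟨h1, h2, ?_⟩
      intro w hw
      rcases List.mem_cons.1 hw with rfl | hwr
      · exact hc
      · exact h3 w hwr

lemma gOuter_false (n : Int) (b' : List (List Int)) (s0 : Int × Int) (L : List Int) :
    ∀ (acc : PySem.Set (Int × Int) × Bool),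
      (L.foldl (gRow n b' s0) acc).2 = false →
      acc.2 = false ∧ (L.foldl (gRow n b' s0) acc).1 = acc.1 ∧
      ∀ i ∈ L, ∀ j ∈ pvRowIdx n b' i, ¬ pvC2 b' s0 acc.1 i j := by
  induction L with
  | nil => intro acc h; exact ⟨h, rfl, by simp⟩
  | cons i L' ih =>
    intro acc h
    simp only [List.foldl_cons] at h ⊢
    obtain ⟨hfl, hset, hcond⟩ := ih _ h
    unfold gRow at hfl hset hcond ⊢
    obtain ⟨h1, h2, h3⟩ := gInner_false b' s0 i (pvRowIdx n b' i) acc hfl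
    refine ⟨h1, by rw [hset, h2], ?_⟩
    intro i' hi' j hj
    rcases List.mem_cons.1 hi' with rfl | hiL
    · exact h3 j hj
    · have := hcond i' hiL j hj
      rw [h2] at this
      exact this

lemma gSweep_nochange (n : Int) (b' : List (List Int)) (s0 : Int × Int) (D : PySem.Set (Int × Int))
    (h : (gSweep n b' s0 D).2 = false) : (gSweep n b' s0 D).1 = D := by
  unfold gSweep at h ⊢
  exact (gOuter_false n b' s0 _ _ h).2.1

lemma gSweep_complete (n : Int) (b' : List (List Int)) (s0 : Int × Int) (D : PySem.Set (Int × Int))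
    (h : (gSweep n b' s0 D).2 = false) (i j : Int)
    (hi0 : 0 ≤ i) (hin : i < n) (hj0 : 0 ≤ j) (hjn : j < n)
    (hget : pvGet2 b' i j = some 0)
    (hnb : (i - 1, j) ∈ s0 :: D ∨ (i + 1, j) ∈ s0 :: D ∨ (i, j - 1) ∈ s0 :: D ∨ (i, j + 1) ∈ s0 :: D) :
    (i, j) ∈ D := by
  unfold gSweep at h
  obtain ⟨_, _, hcond⟩ := gOuter_false n b' s0 _ _ h
  by_contra hns
  have hiL : i ∈ PySem.List.pyRange 0 n 1 := (PySem.List.mem_pyRange_one).2 ⟨hi0, hin⟩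
  have hjL : j ∈ pvRowIdx n b' i := by
    rcases Option.bind_eq_some_iff.1 hget with ⟨row, hrow, hcell⟩
    rw [PySem.List.pyGet?_of_nonneg _ hj0] at hcell
    have hjlen : j.toNat < row.length := by
      rcases Nat.lt_or_ge j.toNat row.length with h' | h'
      · exact h'
      · rw [List.getElem?_eq_none h'] at hcell; cases hcell
    unfold pvRowIdx
    rw [hrow]
    refine (PySem.List.mem_pyRange_one).2 ⟨hj0, ?_⟩
    simp only [Option.getD_some, PySem.List.len_eq]
    omega
  exact hcond i hiL j hjL ⟨hget, hns, hnb⟩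

lemma gLoop_sound (n : Int) (b' : List (List Int)) (s0 : Int × Int) (R : Int × Int → Prop)
    (Hstep : ∀ p q, R p → q ∈ pvDirs4 p → 0 ≤ q.1 → q.1 < n → 0 ≤ q.2 → q.2 < n →
      pvGet2 b' q.1 q.2 = some 0 → R q) (hRs0 : R s0) :
    ∀ (N : Nat) (D : PySem.Set (Int × Int)), pvZB b' D ≤ N →
      (∀ p ∈ D, R p) → ∀ p ∈ gLoop n b' s0 D, R p := by
  intro N
  induction N with
  | zero =>
    intro D h hR p hp
    rw [gLoop] at hp
    split_ifs at hp with hfl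
    · exact absurd (gSweep_decr n b' s0 D hfl) (by omega)
    · exact gSweep_sound n b' s0 R Hstep hRs0 D hR p hp
  | succ N ih =>
    intro D h hR p hp
    rw [gLoop] at hp
    split_ifs at hp with hfl
    · have := gSweep_decr n b' s0 D hfl
      exact ih _ (by omega) (gSweep_sound n b' s0 R Hstep hRs0 D hR) p hp
    · exact gSweep_sound n b' s0 R Hstep hRs0 D hR p hp

lemma gLoop_closed (n : Int) (b' : List (List Int)) (s0 : Int × Int) :
    ∀ (N : Nat) (D : PySem.Set (Int × Int)), pvZB b' D ≤ N →
      ∀ p, (p = s0 ∨ p ∈ gLoop n b' s0 D) → ∀ nb ∈ pvDirs4 p,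
        0 ≤ nb.1 → nb.1 < n → 0 ≤ nb.2 → nb.2 < n → pvGet2 b' nb.1 nb.2 = some 0 →
        nb ∈ gLoop n b' s0 D := by
  intro N
  induction N with
  | zero =>
    intro D h p hp nb hnb h1 h2 h3 h4 h5
    rw [gLoop] at hp ⊢
    split_ifs at hp ⊢ with hfl
    · exact absurd (gSweep_decr n b' s0 D hfl) (by omega)
    · rw [gSweep_nochange n b' s0 D (by simpa using hfl)] at hp ⊢
      refine gSweep_complete n b' s0 D (by simpa using hfl) nb.1 nb.2 h1 h2 h3 h4 h5 ?_
      have hps : p ∈ pvDirs4 nb := (pvDirs4_symm p nb).1 hnb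
      have hpm : p ∈ s0 :: D := by
        rcases hp with rfl | hp
        · exact List.mem_cons_self
        · exact List.mem_cons_of_mem _ hp
      simp only [pvDirs4, List.mem_cons, List.not_mem_nil, or_false] at hps
      rcases hps with rfl | rfl | rfl | rfl
      · exact Or.inl hpm
      · exact Or.inr (Or.inl hpm)
      · exact Or.inr (Or.inr (Or.inl hpm))
      · exact Or.inr (Or.inr (Or.inr hpm))
  | succ N ih =>
    intro D h p hp nb hnb h1 h2 h3 h4 h5
    rw [gLoop] at hp ⊢
    split_ifs at hp ⊢ with hfl
    · have := gSweep_decr n b' s0 D hfl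
      exact ih _ (by omega) p hp nb hnb h1 h2 h3 h4 h5
    · rw [gSweep_nochange n b' s0 D (by simpa using hfl)] at hp ⊢
      refine gSweep_complete n b' s0 D (by simpa using hfl) nb.1 nb.2 h1 h2 h3 h4 h5 ?_
      have hps : p ∈ pvDirs4 nb := (pvDirs4_symm p nb).1 hnb
      have hpm : p ∈ s0 :: D := by
        rcases hp with rfl | hp
        · exact List.mem_cons_self
        · exact List.mem_cons_of_mem _ hp
      simp only [pvDirs4, List.mem_cons, List.not_mem_nil, or_false] at hps
      rcases hps with rfl | rfl | rfl | rfl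
      · exact Or.inl hpm
      · exact Or.inr (Or.inl hpm)
      · exact Or.inr (Or.inr (Or.inl hpm))
      · exact Or.inr (Or.inr (Or.inr hpm))

-- every cell the sweeps ever add is an in-bounds zero cell
lemma gLoop_props (n : Int) (b' : List (List Int)) (s0 : Int × Int) :
    ∀ (N : Nat) (D : PySem.Set (Int × Int)), pvZB b' D ≤ N →
      ∀ p ∈ gLoop n b' s0 D,
        p ∈ D ∨ (0 ≤ p.1 ∧ p.1 < n ∧ 0 ≤ p.2 ∧ p.2 < n ∧ pvGet2 b' p.1 p.2 = some 0) := by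
  have hsw : ∀ (D : PySem.Set (Int × Int)), ∀ p ∈ (gSweep n b' s0 D).1,
      p ∈ D ∨ (0 ≤ p.1 ∧ p.1 < n ∧ 0 ≤ p.2 ∧ p.2 < n ∧ pvGet2 b' p.1 p.2 = some 0) := by
    intro D
    unfold gSweep
    refine pvFoldPresMem (fun t : PySem.Set (Int × Int) × Bool => ∀ p ∈ t.1,
      p ∈ D ∨ (0 ≤ p.1 ∧ p.1 < n ∧ 0 ≤ p.2 ∧ p.2 < n ∧ pvGet2 b' p.1 p.2 = some 0)) _ _ ?_ _
      (fun p hp => Or.inl hp)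
    intro t i hi hP
    have hi' := (PySem.List.mem_pyRange_one).1 hi
    unfold gRow
    refine pvFoldPresMem (fun t : PySem.Set (Int × Int) × Bool => ∀ p ∈ t.1,
      p ∈ D ∨ (0 ≤ p.1 ∧ p.1 < n ∧ 0 ≤ p.2 ∧ p.2 < n ∧ pvGet2 b' p.1 p.2 = some 0)) _ _ ?_ _ hP
    intro t2 j hj hP2
    have hj' := (PySem.List.mem_pyRange_one).1 hj
    split_ifs with hc
    · intro p hp
      rcases (PySem.Set.mem_add t2.1 (i, j) p).1 hp with hp | rfl
      · exact hP2 p hp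
      · exact Or.inr ⟨by omega, by omega, by omega, by omega, hc.1⟩
    · exact hP2
  intro N
  induction N with
  | zero =>
    intro D h p hp
    rw [gLoop] at hp
    split_ifs at hp with hfl
    · exact absurd (gSweep_decr n b' s0 D hfl) (by omega)
    · exact hsw D p hp
  | succ N ih =>
    intro D h p hp
    rw [gLoop] at hp
    split_ifs at hp with hfl
    · have hd := gSweep_decr n b' s0 D hfl
      rcases ih _ (by omega) p hp with hin | hb
      · exact hsw D p hin
      · exact Or.inr hb
    · exact hsw D p hp

-- ===== VERDICT (by name: the statement is the Claim_ definition above) =====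
theorem board_bfs_spec : Claim_equal_board_bfs := by
  intro y x board _hdom _hpre
  unfold Spec_board_bfs
  set n : Int := (board.length : Int) with hn
  set b' : List (List Int) := pvSet2 board y x 1 with hb'
  have hs0 : ¬ pvGet2 b' ((y, x) : Int × Int).1 ((y, x) : Int × Int).2 = some 0 := by
    rw [hb']
    exact pvGet2_set2_one_ne board y x
  have hrebnil : pvRebuild b' PySem.Set.empty = b' := pvRebuild_nil b'
  set F : PySem.Set (Int × Int) × List (Int × Int) :=
    pvBFlat n b' PySem.Set.empty [] [(y, x)] with hF
  set DS : PySem.Set (Int × Int) := gLoop n b' (y, x) PySem.Set.empty with hDS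
  -- A's loop in closed form
  have hmain := pvMain b' n (2 * pvZB b' PySem.Set.empty + 1) [(y, x)] PySem.Set.empty
    (none, none, -1, -1) (by simp)
  rw [← hF, hrebnil] at hmain
  simp only [List.singleton_append] at hmain
  have hfoldA : List.foldl pvMM (none, none, -1, -1) ((y, x) :: F.2)
      = (some (List.foldl min x (F.2.map Prod.snd)), some (List.foldl min y (F.2.map Prod.fst)),
         List.foldl max (max (-1) x) (F.2.map Prod.snd), List.foldl max (max (-1) y) (F.2.map Prod.fst)) :=
    pvMM_fold_cons (y, x) F.2
  have hA : board_bfs y x board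
      = ((PySem.List.pyRange (List.foldl min y (F.2.map Prod.fst))
            (List.foldl max (max (-1) y) (F.2.map Prod.fst) + 1) 1).map
          (fun i => PySem.List.slice ((PySem.List.pyGet? board i).getD [])
            (some (List.foldl min x (F.2.map Prod.snd)))
            (some (List.foldl max (max (-1) x) (F.2.map Prod.snd) + 1))),
         pvRebuild b' F.1) := by
    simp only [board_bfs]
    rw [← hb', ← hn, hmain, hfoldA]
    simp only
    rw [PySem.List.foldl_append_singleton_eq_map, List.nil_append]
  -- B's loop via the ghost
  have hofl : PySem.Set.ofList [((y : Int), (x : Int))] = ((y, x) : Int × Int) :: PySem.Set.empty := rfl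
  have hsim := pvSweepLoop_sim n b' (y, x) hs0 (pvZB b' PySem.Set.empty) PySem.Set.empty le_rfl
  rw [hrebnil, ← hDS] at hsim
  have hfoldB : List.foldl pvMM (none, none, -1, -1) ((y, x) :: DS)
      = (some (List.foldl min x (DS.map Prod.snd)), some (List.foldl min y (DS.map Prod.fst)),
         List.foldl max (max (-1) x) (DS.map Prod.snd), List.foldl max (max (-1) y) (DS.map Prod.fst)) :=
    pvMM_fold_cons (y, x) DS
  have hB : board_bfs_alt y x board
      = ((PySem.List.pyRange (List.foldl min y (DS.map Prod.fst))
            (List.foldl max (max (-1) y) (DS.map Prod.fst) + 1) 1).map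
          (fun i => PySem.List.slice ((PySem.List.pyGet? board i).getD [])
            (some (List.foldl min x (DS.map Prod.snd)))
            (some (List.foldl max (max (-1) x) (DS.map Prod.snd) + 1))),
         pvRebuild b' DS) := by
    simp only [board_bfs_alt]
    rw [← hb', ← hn, hofl, hsim]
    rw [show ((pvRebuild b' DS, (y, x) :: DS) :
        List (List Int) × PySem.Set (Int × Int)).2.foldl pvMM (none, none, -1, -1)
      = List.foldl pvMM (none, none, -1, -1) ((y, x) :: DS) from rfl]
    rw [hfoldB]
    simp only [Option.getD_some]
  -- the two visited sets have the same members
  have Hstep : ∀ p q : Int × Int, pvReach n b' (y, x) p → q ∈ pvDirs4 p → 0 ≤ q.1 →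
      q.1 < n → 0 ≤ q.2 → q.2 < n → pvGet2 b' q.1 q.2 = some 0 → pvReach n b' (y, x) q :=
    fun p q hp hd h1 h2 h3 h4 h5 => pvReach.step p q hp hd h1 h2 h3 h4 h5
  have hemp : ∀ P : Int × Int → Prop, ∀ p ∈ (PySem.Set.empty : PySem.Set (Int × Int)), P p := by
    intro P p hp
    simp [PySem.Set.empty] at hp
  have hF_R : ∀ p ∈ F.1, pvReach n b' (y, x) p := by
    rw [hF]
    refine pvBFlat_sound n b' _ Hstep (2 * pvZB b' PySem.Set.empty + 1) [(y, x)] PySem.Set.empty []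
      (by simp) (hemp _) ?_
    intro c hc
    simp only [List.mem_singleton] at hc
    subst hc
    exact pvReach.base
  have hR_F : ∀ p, pvReach n b' (y, x) p → p = (y, x) ∨ p ∈ F.1 := by
    have hclosed := pvBFlat_closed n b' (2 * pvZB b' PySem.Set.empty + 1) [(y, x)]
      PySem.Set.empty [] (by simp) (fun p hp => absurd hp (by simp [PySem.Set.empty]))
    rw [← hF] at hclosed
    intro p hr
    induction hr with
    | base => exact Or.inl rfl
    | step p' q' hp' hd h1 h2 h3 h4 h5 ih =>
      refine Or.inr (hclosed p' ?_ q' hd h1 h2 h3 h4 h5)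
      rcases ih with rfl | hin
      · exact Or.inr (by simp)
      · exact Or.inl hin
  have hF_props := pvBFlat_props n b' (2 * pvZB b' PySem.Set.empty + 1) [(y, x)]
    PySem.Set.empty [] (by simp)
  rw [← hF] at hF_props
  have hDS_R : ∀ p ∈ DS, pvReach n b' (y, x) p := by
    rw [hDS]
    exact gLoop_sound n b' (y, x) _ Hstep pvReach.base (pvZB b' PySem.Set.empty)
      PySem.Set.empty le_rfl (hemp _)
  have hR_DS : ∀ p, pvReach n b' (y, x) p → p = (y, x) ∨ p ∈ DS := by
    intro p hr
    induction hr with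
    | base => exact Or.inl rfl
    | step p' q' hp' hd h1 h2 h3 h4 h5 ih =>
      refine Or.inr ?_
      rw [hDS]
      refine gLoop_closed n b' (y, x) (pvZB b' PySem.Set.empty) PySem.Set.empty le_rfl p' ?_
        q' hd h1 h2 h3 h4 h5
      rw [← hDS]
      exact ih
  have hDS_props : ∀ p ∈ DS,
      p ∈ (PySem.Set.empty : PySem.Set (Int × Int)) ∨
        (0 ≤ p.1 ∧ p.1 < n ∧ 0 ≤ p.2 ∧ p.2 < n ∧ pvGet2 b' p.1 p.2 = some 0) := by
    rw [hDS]
    exact gLoop_props n b' (y, x) (pvZB b' PySem.Set.empty) PySem.Set.empty le_rfl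
  have hiff : ∀ p : Int × Int, p ∈ F.1 ↔ p ∈ DS := by
    intro p
    constructor
    · intro hp
      rcases hR_DS p (hF_R p hp) with heq | hmem
      · exfalso
        rcases hF_props p hp with hin | hb
        · exact hemp (fun _ => False) _ hin
        · exact hs0 (heq ▸ hb.2.2.2.2)
      · exact hmem
    · intro hp
      rcases hR_F p (hDS_R p hp) with heq | hmem
      · exfalso
        rcases hDS_props p hp with hin | hb
        · exact hemp (fun _ => False) _ hin
        · exact hs0 (heq ▸ hb.2.2.2.2)
      · exact hmem
  -- coordinate collections agree, hence the bounding boxes agree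
  have hfst : ∀ z : Int, z ∈ F.2.map Prod.fst ↔ z ∈ DS.map Prod.fst := by
    intro z
    constructor
    · intro hz
      rcases List.mem_map.1 hz with ⟨p, hp, rfl⟩
      have hp1 : p ∈ F.1 := by
        have := pvBFlat_seenChar n b' (2 * pvZB b' PySem.Set.empty + 1) [(y, x)]
          PySem.Set.empty p (by simp)
        rw [← hF] at this
        exact this.2 (Or.inr hp)
      exact List.mem_map.2 ⟨p, (hiff p).1 hp1, rfl⟩
    · intro hz
      rcases List.mem_map.1 hz with ⟨p, hp, rfl⟩
      have hp1 : p ∈ F.1 := (hiff p).2 hp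
      have := pvBFlat_seenChar n b' (2 * pvZB b' PySem.Set.empty + 1) [(y, x)]
        PySem.Set.empty p (by simp)
      rw [← hF] at this
      rcases this.1 hp1 with hin | hin
      · exact absurd hin (by simp [PySem.Set.empty])
      · exact List.mem_map.2 ⟨p, hin, rfl⟩
  have hsnd : ∀ z : Int, z ∈ F.2.map Prod.snd ↔ z ∈ DS.map Prod.snd := by
    intro z
    constructor
    · intro hz
      rcases List.mem_map.1 hz with ⟨p, hp, rfl⟩
      have hp1 : p ∈ F.1 := by
        have := pvBFlat_seenChar n b' (2 * pvZB b' PySem.Set.empty + 1) [(y, x)]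
          PySem.Set.empty p (by simp)
        rw [← hF] at this
        exact this.2 (Or.inr hp)
      exact List.mem_map.2 ⟨p, (hiff p).1 hp1, rfl⟩
    · intro hz
      rcases List.mem_map.1 hz with ⟨p, hp, rfl⟩
      have hp1 : p ∈ F.1 := (hiff p).2 hp
      have := pvBFlat_seenChar n b' (2 * pvZB b' PySem.Set.empty + 1) [(y, x)]
        PySem.Set.empty p (by simp)
      rw [← hF] at this
      rcases this.1 hp1 with hin | hin
      · exact absurd hin (by simp [PySem.Set.empty])
      · exact List.mem_map.2 ⟨p, hin, rfl⟩
  rw [hA, hB]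
  rw [pvFoldMin_eq y (F.2.map Prod.fst) (DS.map Prod.fst) hfst,
      pvFoldMax_eq (max (-1) y) (F.2.map Prod.fst) (DS.map Prod.fst) hfst,
      pvFoldMin_eq x (F.2.map Prod.snd) (DS.map Prod.snd) hsnd,
      pvFoldMax_eq (max (-1) x) (F.2.map Prod.snd) (DS.map Prod.snd) hsnd,
      pvRebuild_congr b' F.1 DS hiff]
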